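-- pv_equiv track=rewrite | github.com/MikhailSukhanov/DS_projects | DS_topics_Python_implementation/Network_analysis.py | shortest_paths_from
-- ===== SOURCE A (Python) =====
-- from typing import Dict, List, Callable, Tuple
-- from collections import deque
--
-- Friendships = Dict[int, List[int]]
--
-- Path = List[int]
--
-- def shortest_paths_from(from_user_id: int, friendships: Friendships) -> Dict[int, List[Path]]:
-- 	shortest_paths_to: Dict[int, List[Path]] = {from_user_id: [[]]}
-- 	frontier = deque((from_user_id, friend_id)
-- 					 for friend_id in friendships[from_user_id])
-- 	while frontier:
-- 		prev_user_id, user_id = frontier.popleft()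
-- 		paths_to_prev_user = shortest_paths_to[prev_user_id]
-- 		new_paths_to_user = [path + [user_id] for path in paths_to_prev_user]
-- 		old_paths_to_user = shortest_paths_to.get(user_id, [])
--
-- 		if old_paths_to_user:
-- 			min_path_length = len(old_paths_to_user[0])
-- 		else:
-- 			min_path_length = float('inf')
-- 		new_paths_to_user = [path for path in new_paths_to_user
-- 							 if len(path) <= min_path_length
-- 							 and path not in old_paths_to_user]
--
-- 		shortest_paths_to[user_id] = old_paths_to_user + new_paths_to_user
-- 		frontier.extend((user_id, friend_id)
-- 						for friend_id in friendships[user_id]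
-- 						if friend_id not in shortest_paths_to)
--
-- 	return shortest_paths_to
-- ===== SOURCE B (Python) =====
-- from collections import deque
--
-- def shortest_paths_from(from_user_id, friendships):
-- 	# Stage 1: a deduplicated worklist of not-yet-discovered vertices.
-- 	universe = []
-- 	for u, fs in friendships.items():
-- 		for x in [u] + fs:
-- 			if x not in universe:
-- 				universe.append(x)
-- 	pending = [x for x in universe if x != from_user_id]
-- 	# Stage 2: BFS over the edge queue, recording per node only its distance
-- 	# and the ordered list of its shortest-path predecessors; discovery is
-- 	# tracked by removing a vertex from the pending worklist.
-- 	info = {from_user_id: (0, [])}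
-- 	frontier = deque((from_user_id, f) for f in friendships[from_user_id])
-- 	while frontier:
-- 		u, v = frontier.popleft()
-- 		if v in pending:
-- 			pending.remove(v)
-- 			info[v] = (info[u][0] + 1, [u])
-- 		else:
-- 			dv, ps = info[v]
-- 			if dv == info[u][0] + 1 and u not in ps:
-- 				info[v] = (dv, ps + [u])
-- 		frontier.extend((v, f) for f in friendships[v] if f in pending)
-- 	# Stage 3: rebuild every node's shortest-path list in discovery order.
-- 	paths = {from_user_id: [[]]}
-- 	for v in list(info)[1:]:
-- 		paths[v] = [p + [v] for u in info[v][1] for p in paths[u]]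
-- 	return paths
-- ===== Notes on version B (the rewrite author's own statement) =====
-- stated objective: alternative
-- what changed: A accumulates full deduplicated shortest-path lists inside the BFS frontier loop (rebuilding and membership-testing whole path lists on every popped edge); B keeps an explicit worklist of undiscovered vertices and a single dict fusing each node's distance with its ordered predecessor list, and reconstructs all shortest-path lists afterwards in discovery order.
import Mathlib
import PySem

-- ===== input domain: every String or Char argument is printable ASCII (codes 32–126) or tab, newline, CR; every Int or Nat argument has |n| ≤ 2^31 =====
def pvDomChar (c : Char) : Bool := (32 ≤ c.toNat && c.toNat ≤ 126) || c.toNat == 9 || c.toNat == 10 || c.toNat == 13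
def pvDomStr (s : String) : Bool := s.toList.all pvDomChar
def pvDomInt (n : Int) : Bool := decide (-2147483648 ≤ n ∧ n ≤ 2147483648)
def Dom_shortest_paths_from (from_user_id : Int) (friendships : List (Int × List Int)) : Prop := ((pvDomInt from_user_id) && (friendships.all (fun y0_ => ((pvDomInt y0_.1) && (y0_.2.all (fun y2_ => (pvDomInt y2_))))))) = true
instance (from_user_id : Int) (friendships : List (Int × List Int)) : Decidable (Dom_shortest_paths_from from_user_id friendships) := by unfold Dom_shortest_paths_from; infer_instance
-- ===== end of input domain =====

-- B replaces A's accumulation of full deduplicated path lists inside the BFS loop by a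
-- BFS over an explicit worklist of undiscovered vertices that records per node only its
-- distance and ordered predecessor list (one fused dict), plus a reconstruction pass.

-- A-side termination helpers (cited by pvAloop's decreasing_by)
theorem pvCountP_lt {V : List Int} {p q : Int → Bool}
    (hmono : ∀ x, q x = true → p x = true) {a : Int} (ha : a ∈ V)
    (hpa : p a = true) (hqa : q a = false) :
    V.countP q < V.countP p := by
  induction V with
  | nil => cases ha
  | cons b t ih =>
    have hle := List.countP_mono_left (l := t) (fun x _ h => hmono x h)
    rcases List.mem_cons.1 ha with rfl | hb
    · simp [List.countP_cons, hpa, hqa]; omega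
    · have := ih hb
      simp only [List.countP_cons]
      by_cases hq : q b = true
      · simp [hq, hmono b hq]; omega
      · simp only [Bool.not_eq_true] at hq
        simp only [hq]
        by_cases hp : p b = true <;> simp [hp] <;> omega

theorem pvContains_insert_same {ν : Type} (P : PySem.Dict Int ν) (u : Int) (w : ν)
    (hc : P.contains u = true) (x : Int) : (P.insert u w).contains x = P.contains x := by
  rw [PySem.Dict.contains_insert]
  by_cases hxu : x = u
  · subst hxu; simp [hc]
  · simp [hxu]

def pvTargets (friendships : List (Int × List Int)) : List Int := friendships.flatMap (·.2)

theorem pvTargets_spec (friendships : List (Int × List Int)) :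
    ∀ k vs, (PySem.Dict.mk friendships).get? k = some vs → ∀ x ∈ vs, x ∈ pvTargets friendships := by
  induction friendships with
  | nil => intro k vs h; simp [PySem.Dict.get?] at h
  | cons p t ih =>
    intro k vs h x hx
    rw [show (PySem.Dict.mk (p :: t)) = (PySem.Dict.mk ((p.1, p.2) :: t)) by rfl,
      PySem.Dict.get?_mk_cons] at h
    simp only [pvTargets, List.flatMap_cons, List.mem_append]
    split at h
    · left; cases h; exact hx
    · right; exact ih k vs h x hx

theorem pvMeasure_dec (V : List Int) (P : PySem.Dict Int (List (List Int)))
    (u prev : Int) (w : List (List Int)) (fr : List Int) (rest : List (Int × Int))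
    (hu : u ∈ V) :
    Prod.Lex (· < ·) (· < ·)
      (V.countP (fun x => !((P.insert u w).contains x)),
       ((rest ++ (fr.filter (fun f => !((P.insert u w).contains f))).map
          (fun f => (u, f))).countP (fun e => (P.insert u w).contains e.2)))
      (V.countP (fun x => !(P.contains x)),
       (((prev, u) :: rest).countP (fun e => P.contains e.2))) := by
  by_cases hc : P.contains u = true
  · apply Prod.Lex.right'
    · apply Nat.le_of_eq
      apply List.countP_congr
      intro x _
      rw [pvContains_insert_same _ _ _ hc]
    · simp only [List.countP_append, List.countP_cons]
      have hnews : ((fr.filter (fun f => !((P.insert u w).contains f))).map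
          (fun f => (u, f))).countP (fun e => (P.insert u w).contains e.2) = 0 := by
        apply List.countP_eq_zero.2
        intro e he
        rcases List.mem_map.1 he with ⟨f, hf, rfl⟩
        simpa using (List.mem_filter.1 hf).2
      rw [hnews]
      have hrest : rest.countP (fun e => (P.insert u w).contains e.2)
          = rest.countP (fun e => P.contains e.2) := by
        apply List.countP_congr
        intro e _
        rw [pvContains_insert_same _ _ _ hc]
      rw [hrest]
      simp [hc]
  · apply Prod.Lex.left
    apply pvCountP_lt (a := u)
    · intro x hx
      simp only [Bool.not_eq_eq_eq_not, Bool.not_true, Bool.not_eq_true] at hx ⊢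
      rw [PySem.Dict.contains_insert] at hx
      exact (Bool.or_eq_false_iff.1 hx).2
    · exact hu
    · simp [hc]
    · simp [PySem.Dict.contains_insert]

-- ===== PORT A =====  (literal transliteration of A's BFS loop)
def pvAloop (g : PySem.Dict Int (List Int)) (V : List Int)
    (P : PySem.Dict Int (List (List Int))) (F : List (Int × Int))
    (hg : ∀ k vs, g.get? k = some vs → ∀ x ∈ vs, x ∈ V)
    (hF : ∀ e ∈ F, e.2 ∈ V) : PySem.Dict Int (List (List Int)) :=
  match F, hF with
  | [], _ => P
  | (prev, u) :: rest, hF =>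
    let paths_prev := P.getD prev []          -- shortest_paths_to[prev_user_id] (prev is always a key)
    let new_paths := paths_prev.map (fun p => p ++ [u])
    let old := P.getD u []                    -- shortest_paths_to.get(user_id, [])
    -- min_path_length: 'none' plays float('inf')  (hand-port of the inf sentinel; exact)
    let minlen : Option Nat := match old with | [] => none | q :: _ => some q.length
    let new2 := new_paths.filter (fun p =>
      (match minlen with | none => true | some m => decide (p.length ≤ m)) && !(old.contains p))
    let P' := P.insert u (old ++ new2)
    match hget : g.get? u with
    | none => P'                              -- Python raises KeyError here; outside Pre_
    | some fr =>
        pvAloop g V P' (rest ++ (fr.filter (fun f => !(P'.contains f))).map (fun f => (u, f))) hg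
          (by
            intro e he
            rcases List.mem_append.1 he with h | h
            · exact hF e (List.mem_cons_of_mem _ h)
            · rcases List.mem_map.1 h with ⟨f, hf, rfl⟩
              exact hg u fr hget f (List.mem_filter.1 hf).1)
  termination_by (V.countP (fun x => !(P.contains x)), F.countP (fun e => P.contains e.2))
  decreasing_by
    exact pvMeasure_dec V P u prev _ fr rest (hF (prev, u) List.mem_cons_self)

def shortest_paths_from (from_user_id : Int) (friendships : List (Int × List Int)) :
    List (Int × List (List Int)) :=
  let g := PySem.Dict.mk friendships
  match hs : g.get? from_user_id with
  | none => []                              -- Python: KeyError on friendships[from_user_id]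
  | some fr =>
      (pvAloop g (pvTargets friendships) ((PySem.Dict.empty).insert from_user_id [[]])
        (fr.map (fun f => (from_user_id, f))) (pvTargets_spec friendships)
        (by
          intro e he
          rcases List.mem_map.1 he with ⟨f, hf, rfl⟩
          exact pvTargets_spec friendships from_user_id fr hs f hf)).items

-- ===== PORT B =====  (worklist BFS: fused (distance, predecessors) dict, pending vertex list)

-- Stage 1: the deduplicated vertex pool (Python: list(dict.fromkeys(...)))
def pvUniverse (friendships : List (Int × List Int)) : List Int :=
  PySem.List.dedup (friendships.flatMap (fun p => p.1 :: p.2))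

-- one popped edge (u, v): Python's if/else body updating info
def pvIStep (info : PySem.Dict Int (Int × List Int)) (pending : List Int) (u v : Int) :
    PySem.Dict Int (Int × List Int) :=
  if pending.contains v then
    -- discovery: info[u] always exists in Python (getD is a totality guard)
    info.insert v ((info.getD u (0, [])).1 + 1, [u])
  else
    match info.get? v with
    | some dp =>
        if dp.1 == (info.getD u (0, [])).1 + 1 && !(dp.2.contains u) then
          info.insert v (dp.1, dp.2 ++ [u])
        else info
    | none => info              -- unreachable: a non-pending frontier target is always known

-- worklist-based termination: a discovery shrinks pending, otherwise the count of
-- frontier edges with already-discovered target drops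
theorem pvBfs_dec (pending : List Int) (u v : Int) (fr : List Int) (rest : List (Int × Int)) :
    Prod.Lex (· < ·) (· < ·)
      ((pending.erase v).length,
        ((rest ++ (fr.filter (pending.erase v).contains).map (fun f => (v, f))).countP
          (fun e => !((pending.erase v).contains e.2))))
      (pending.length, (((u, v) :: rest).countP (fun e => !(pending.contains e.2)))) := by
  by_cases hv : v ∈ pending
  · apply Prod.Lex.left
    have h1 := List.length_erase_of_mem hv
    have h2 := List.length_pos_of_mem hv
    omega
  · rw [List.erase_of_not_mem hv]
    apply Prod.Lex.right'
    · exact le_rfl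
    · rw [List.countP_append, List.countP_cons]
      have h0 : ((fr.filter pending.contains).map (fun f => (v, f))).countP
          (fun e => !(pending.contains e.2)) = 0 := by
        apply List.countP_eq_zero.2
        intro e he
        rcases List.mem_map.1 he with ⟨f, hf, rfl⟩
        simpa using (List.mem_filter.1 hf).2
      have hcv : pending.contains v = false := by simpa using hv
      simp only [h0, hcv]
      simp

def pvBfs (g : PySem.Dict Int (List Int)) (info : PySem.Dict Int (Int × List Int))
    (pending : List Int) (F : List (Int × Int)) : PySem.Dict Int (Int × List Int) :=
  match F with
  | [] => info
  | (u, v) :: rest =>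
    match g.get? v with
    | none => pvIStep info pending u v        -- Python raises KeyError here; outside Pre_
    | some fr =>
        -- pending.erase v is Python's state after the branch: remove(v) on discovery,
        -- unchanged otherwise (erasing an absent element is the identity)
        pvBfs g (pvIStep info pending u v) (pending.erase v)
          (rest ++ (fr.filter (pending.erase v).contains).map (fun f => (v, f)))
  termination_by (pending.length, F.countP (fun e => !(pending.contains e.2)))
  decreasing_by
    exact pvBfs_dec pending u v fr rest

-- Stage 3: paths[v] = [p + [v] for u in info[v][1] for p in paths[u]] in discovery order
def pvReconI (info : PySem.Dict Int (Int × List Int)) (s : Int) (order : List Int) :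
    PySem.Dict Int (List (List Int)) :=
  order.foldl (fun paths v => paths.insert v
      (((info.getD v (0, [])).2).flatMap (fun u => (paths.getD u []).map (fun p => p ++ [v]))))
    ((PySem.Dict.empty).insert s [[]])

def shortest_paths_from_alt (from_user_id : Int) (friendships : List (Int × List Int)) :
    List (Int × List (List Int)) :=
  let g := PySem.Dict.mk friendships
  match g.get? from_user_id with
  | none => []                              -- Python: KeyError on friendships[from_user_id]
  | some fr =>
      let info := pvBfs g ((PySem.Dict.empty).insert from_user_id (0, []))
        ((pvUniverse friendships).filter (fun x => !(x == from_user_id)))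
        (fr.map (fun f => (from_user_id, f)))
      (pvReconI info from_user_id (info.keys.drop 1)).items

-- ===== PRECONDITION & SPEC =====
-- Pre_ is exactly where A returns without a KeyError: from_user_id is a key and every vertex
-- of its reachable closure is a key (A raises KeyError at friendships[v] for the first
-- reachable non-key v).  The closure is a plain reachability fixpoint of the input graph
-- (one saturation step per round, enough rounds to saturate), not a run of either program.
def pvStepR (g : PySem.Dict Int (List Int)) (seen : List Int) : List Int :=
  PySem.Set.update seen (seen.flatMap (fun x => g.getD x []))

def pvReach (friendships : List (Int × List Int)) (s : Int) : List Int :=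
  (pvStepR (PySem.Dict.mk friendships))^[(friendships.flatMap (fun p => p.1 :: p.2)).length + 1]
    [s]

def Pre_shortest_paths_from (from_user_id : Int) (friendships : List (Int × List Int)) : Prop :=
  from_user_id ∈ friendships.map Prod.fst ∧
  ∀ v ∈ pvReach friendships from_user_id, v ∈ friendships.map Prod.fst

instance (from_user_id : Int) (friendships : List (Int × List Int)) :
    Decidable (Pre_shortest_paths_from from_user_id friendships) := by
  unfold Pre_shortest_paths_from; infer_instance

def pvWitness_shortest_paths_from : Int × (List (Int × List Int)) := (0, [(0, [1]), (1, [0])])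

def Spec_shortest_paths_from (from_user_id : Int) (friendships : List (Int × List Int)) (out : List (Int × List (List Int))) : Prop := out = shortest_paths_from_alt from_user_id friendships
instance (from_user_id : Int) (friendships : List (Int × List Int)) (out : List (Int × List (List Int))) : Decidable (Spec_shortest_paths_from from_user_id friendships out) := by unfold Spec_shortest_paths_from; infer_instance

-- ===== CLAIM (what is proved, stated in full; the proofs are below) =====
def Claim_equal_shortest_paths_from : Prop := ∀ (from_user_id : Int) (friendships : List (Int × List Int)), Dom_shortest_paths_from from_user_id friendships → Pre_shortest_paths_from from_user_id friendships → Spec_shortest_paths_from from_user_id friendships (shortest_paths_from from_user_id friendships)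

-- ===== LEMMAS AND PROOFS =====

-- ---------- generic utilities ----------

theorem pvGetElem?_cons_succ {α : Type} (a : α) (l : List α) (i : Nat) :
    (a :: l)[i + 1]? = l[i]? := by simp

theorem pvMem_iff_getElem? {α : Type} {a : α} {l : List α} :
    a ∈ l ↔ ∃ i : Nat, l[i]? = some a := by
  constructor
  · intro h
    rcases List.getElem_of_mem h with ⟨i, hi, rfl⟩
    exact ⟨i, by simp [List.getElem?_eq_getElem hi]⟩
  · rintro ⟨i, hi⟩
    exact List.mem_of_getElem? hi

def pvBefore (l : List Int) (a b : Int) : Prop :=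
  ∃ i j : Nat, i < j ∧ l[i]? = some a ∧ l[j]? = some b

theorem pvBefore_append (l l' : List Int) (a b : Int) (h : pvBefore l a b) :
    pvBefore (l ++ l') a b := by
  obtain ⟨i, j, hij, ha, hb⟩ := h
  have hj : j < l.length := (List.getElem?_eq_some_iff.1 hb).1
  exact ⟨i, j, hij, by rw [List.getElem?_append_left (by omega)]; exact ha,
    by rw [List.getElem?_append_left hj]; exact hb⟩

theorem pvBefore_append_last (l : List Int) (a b : Int) (ha : a ∈ l) :
    pvBefore (l ++ [b]) a b := by
  rcases pvMem_iff_getElem?.1 ha with ⟨i, hi⟩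
  have hil : i < l.length := (List.getElem?_eq_some_iff.1 hi).1
  refine ⟨i, l.length, hil, ?_, ?_⟩
  · rw [List.getElem?_append_left hil]; exact hi
  · simp

-- if a is before b in a nodup list split at b, then a is in the prefix
theorem pvBefore_split {l₁ l₂ : List Int} {a b : Int}
    (hnd : (l₁ ++ b :: l₂).Nodup) (h : pvBefore (l₁ ++ b :: l₂) a b) : a ∈ l₁ := by
  obtain ⟨i, j, hij, ha, hb⟩ := h
  have hjb : j = l₁.length := by
    by_contra hne
    have hj : j < (l₁ ++ b :: l₂).length := (List.getElem?_eq_some_iff.1 hb).1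
    have hbij : (l₁ ++ b :: l₂)[l₁.length]? = some b := by
      rw [List.getElem?_append_right (le_refl _)]; simp
    have : j ≠ l₁.length := hne
    have h1 : (l₁ ++ b :: l₂)[j]'hj = b := by
      have := List.getElem?_eq_getElem hj
      rw [this] at hb; exact Option.some.inj hb
    have hlen : l₁.length < (l₁ ++ b :: l₂).length := by simp
    have h2 : (l₁ ++ b :: l₂)[l₁.length]'hlen = b := by
      have := List.getElem?_eq_getElem hlen
      rw [this] at hbij; exact Option.some.inj hbij
    exact hne ((List.Nodup.getElem_inj_iff hnd).1 (h1.trans h2.symm))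
  subst hjb
  have hi : i < l₁.length := hij
  rw [List.getElem?_append_left hi] at ha
  exact List.mem_of_getElem? ha

-- inserting the value already stored is the identity
theorem pvInsert_self_value {ν : Type} (d : PySem.Dict Int ν) (k : Int) (v : ν)
    (hnd : d.keys.Nodup) (hget : d.get? k = some v) : d.insert k v = d := by
  apply PySem.Dict.ext
  have hc : d.contains k = true := by
    rw [PySem.Dict.contains_eq_isSome_get?, hget]; rfl
  rw [PySem.Dict.items_insert_of_contains (h := hc)]
  have hcong : ∀ p ∈ d.items, (if (p.1 == k) = true then (k, v) else p) = id p := by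
    intro p hp
    by_cases h : p.1 = k
    · have hp' : (k, p.2) ∈ d.items := by
        have : p = (k, p.2) := by rw [← h]
        rwa [← this]
      have := PySem.Dict.get?_of_mem_items (d := d) (k := k) (v := p.2) hp' hnd
      rw [hget] at this
      have hv : v = p.2 := Option.some.inj this
      simp [h, ← hv, Prod.ext_iff]
    · simp [h]
  rw [List.map_congr_left hcong, List.map_id]

-- ---------- the reference BFS loop over (dist, preds), used only by the proofs ----------

def pvDistStep (dist : PySem.Dict Int Int) (u v : Int) : PySem.Dict Int Int :=
  if !(dist.contains v) then dist.insert v (dist.getD u 0 + 1) else dist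

def pvPredsStep (dist : PySem.Dict Int Int) (preds : PySem.Dict Int (List Int)) (u v : Int) :
    PySem.Dict Int (List Int) :=
  if !(dist.contains v) then preds.insert v [u]
  else if dist.getD v 0 == dist.getD u 0 + 1 && !((preds.getD v []).contains u)
    then preds.insert v ((preds.getD v []) ++ [u])
    else preds

def pvNextF (dist' : PySem.Dict Int Int) (v : Int) (fr : List Int) (rest : List (Int × Int)) :
    List (Int × Int) :=
  rest ++ (fr.filter (fun f => !(dist'.contains f))).map (fun f => (v, f))

def pvBloop (g : PySem.Dict Int (List Int)) (V : List Int)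
    (dist : PySem.Dict Int Int) (preds : PySem.Dict Int (List Int)) (F : List (Int × Int))
    (hg : ∀ k vs, g.get? k = some vs → ∀ x ∈ vs, x ∈ V)
    (hF : ∀ e ∈ F, e.2 ∈ V) : PySem.Dict Int Int × PySem.Dict Int (List Int) :=
  match F, hF with
  | [], _ => (dist, preds)
  | (u, v) :: rest, hF =>
    let dist' := if !(dist.contains v) then dist.insert v (dist.getD u 0 + 1) else dist
    let preds' :=
      if !(dist.contains v) then preds.insert v [u]
      else if dist.getD v 0 == dist.getD u 0 + 1 && !((preds.getD v []).contains u)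
        then preds.insert v ((preds.getD v []) ++ [u])
        else preds
    match hget : g.get? v with
    | none => (dist', preds')
    | some fr =>
        pvBloop g V dist' preds' (rest ++ (fr.filter (fun f => !(dist'.contains f))).map
            (fun f => (v, f))) hg
          (by
            intro e he
            rcases List.mem_append.1 he with h | h
            · exact hF e (List.mem_cons_of_mem _ h)
            · rcases List.mem_map.1 h with ⟨f, hf, rfl⟩
              exact hg v fr hget f (List.mem_filter.1 hf).1)
  termination_by (V.countP (fun x => !(dist.contains x)), F.countP (fun e => dist.contains e.2))
  decreasing_by
    by_cases hc : dist.contains v = true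
    · simp only [hc, Bool.not_true, Bool.false_eq_true, dite_false]
      apply Prod.Lex.right'
      · exact le_rfl
      · simp only [List.countP_append, List.countP_cons]
        have hnews : ((fr.filter (fun f => !(dist.contains f))).map
            (fun f => (u, f))).countP (fun e => dist.contains e.2) = 0 := by
          apply List.countP_eq_zero.2
          intro e he
          rcases List.mem_map.1 he with ⟨f, hf, rfl⟩
          simpa using (List.mem_filter.1 hf).2
        simp [hnews, hc]
    · rw [Bool.not_eq_true] at hc
      simp only [hc, Bool.not_false, dite_true]
      apply Prod.Lex.left
      apply pvCountP_lt (a := v)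
      · intro x hx
        simp only [Bool.not_eq_eq_eq_not, Bool.not_true] at hx ⊢
        rw [PySem.Dict.contains_insert] at hx
        exact (Bool.or_eq_false_iff.1 hx).2
      · exact hF (u, v) List.mem_cons_self
      · simp [hc]
      · simp

def pvRecon (preds : PySem.Dict Int (List Int)) (s : Int) (order : List Int) :
    PySem.Dict Int (List (List Int)) :=
  order.foldl (fun paths v => paths.insert v
      ((preds.getD v []).flatMap (fun u => (paths.getD u []).map (fun p => p ++ [v]))))
    ((PySem.Dict.empty).insert s [[]])

theorem pvBloop_nil (g : PySem.Dict Int (List Int)) (V : List Int) (dist : PySem.Dict Int Int)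
    (preds : PySem.Dict Int (List Int)) (hg) (hF) :
    pvBloop g V dist preds [] hg hF = (dist, preds) := by
  rw [pvBloop]

theorem pvBloop_cons (g : PySem.Dict Int (List Int)) (V : List Int) (dist : PySem.Dict Int Int)
    (preds : PySem.Dict Int (List Int)) (u v : Int) (rest : List (Int × Int)) (fr : List Int)
    (hget : g.get? v = some fr) (hg) (hF) (hF') :
    pvBloop g V dist preds ((u, v) :: rest) hg hF =
      pvBloop g V (pvDistStep dist u v) (pvPredsStep dist preds u v)
        (pvNextF (pvDistStep dist u v) v fr rest) hg hF' := by
  rw [pvBloop]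
  simp only [pvDistStep, pvPredsStep, pvNextF]
  split
  · next heq => rw [hget] at heq; cases heq
  · next fr' heq =>
    rw [hget] at heq
    cases heq
    rfl

def pvAStep (P : PySem.Dict Int (List (List Int))) (prev u : Int) :
    PySem.Dict Int (List (List Int)) :=
  let paths_prev := P.getD prev []
  let new_paths := paths_prev.map (fun p => p ++ [u])
  let old := P.getD u []
  let minlen : Option Nat := match old with | [] => none | q :: _ => some q.length
  let new2 := new_paths.filter (fun p =>
    (match minlen with | none => true | some m => decide (p.length ≤ m)) && !(old.contains p))
  P.insert u (old ++ new2)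

def pvNextFA (P' : PySem.Dict Int (List (List Int))) (v : Int) (fr : List Int)
    (rest : List (Int × Int)) : List (Int × Int) :=
  rest ++ (fr.filter (fun f => !(P'.contains f))).map (fun f => (v, f))

theorem pvAloop_nil (g : PySem.Dict Int (List Int)) (V : List Int)
    (P : PySem.Dict Int (List (List Int))) (hg) (hF) :
    pvAloop g V P [] hg hF = P := by
  rw [pvAloop]

theorem pvAloop_cons (g : PySem.Dict Int (List Int)) (V : List Int)
    (P : PySem.Dict Int (List (List Int))) (prev u : Int) (rest : List (Int × Int))
    (fr : List Int) (hget : g.get? u = some fr) (hg) (hF) (hF') :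
    pvAloop g V P ((prev, u) :: rest) hg hF =
      pvAloop g V (pvAStep P prev u) (pvNextFA (pvAStep P prev u) u fr rest) hg hF' := by
  rw [pvAloop]
  simp only [pvAStep, pvNextFA]
  split
  · next heq => rw [hget] at heq; cases heq
  · next fr' heq =>
    rw [hget] at heq
    cases heq
    rfl

theorem pvAloop_cons' (g : PySem.Dict Int (List Int)) (V : List Int)
    (P : PySem.Dict Int (List (List Int))) (prev u : Int) (rest F' : List (Int × Int))
    (fr : List Int) (hget : g.get? u = some fr)
    (hEq : pvNextFA (pvAStep P prev u) u fr rest = F') (hg) (hF) (hF') :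
    pvAloop g V P ((prev, u) :: rest) hg hF = pvAloop g V (pvAStep P prev u) F' hg hF' := by
  subst hEq
  exact pvAloop_cons g V P prev u rest fr hget hg hF hF'

theorem pvBloop_cons_none (g : PySem.Dict Int (List Int)) (V : List Int)
    (dist : PySem.Dict Int Int) (preds : PySem.Dict Int (List Int)) (u v : Int)
    (rest : List (Int × Int)) (hget : g.get? v = none) (hg) (hF) :
    pvBloop g V dist preds ((u, v) :: rest) hg hF =
      (pvDistStep dist u v, pvPredsStep dist preds u v) := by
  rw [pvBloop]
  simp only [pvDistStep, pvPredsStep]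
  split
  · next heq => rfl
  · next fr' heq => rw [hget] at heq; cases heq

theorem pvMeasure_decStep (V : List Int) (dist : PySem.Dict Int Int)
    (u v : Int) (fr : List Int) (rest : List (Int × Int)) (hv : v ∈ V) :
    Prod.Lex (· < ·) (· < ·)
      (V.countP (fun x => !((pvDistStep dist u v).contains x)),
       ((pvNextF (pvDistStep dist u v) v fr rest).countP
          (fun e => (pvDistStep dist u v).contains e.2)))
      (V.countP (fun x => !(dist.contains x)),
       (((u, v) :: rest).countP (fun e => dist.contains e.2))) := by
  by_cases hc : dist.contains v = true
  · have hd : pvDistStep dist u v = dist := by simp [pvDistStep, hc]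
    rw [hd]
    apply Prod.Lex.right'
    · exact le_rfl
    · simp only [pvNextF, List.countP_append, List.countP_cons]
      have hnews : ((fr.filter (fun f => !(dist.contains f))).map
          (fun f => (v, f))).countP (fun e => dist.contains e.2) = 0 := by
        apply List.countP_eq_zero.2
        intro e he
        rcases List.mem_map.1 he with ⟨f, hf, rfl⟩
        simpa using (List.mem_filter.1 hf).2
      simp [hnews, hc]
  · have hd : pvDistStep dist u v = dist.insert v (dist.getD u 0 + 1) := by
      rw [Bool.not_eq_true] at hc; simp [pvDistStep, hc]
    rw [hd]
    apply Prod.Lex.left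
    apply pvCountP_lt (a := v)
    · intro x hx
      simp only [Bool.not_eq_eq_eq_not, Bool.not_true] at hx ⊢
      rw [PySem.Dict.contains_insert] at hx
      exact (Bool.or_eq_false_iff.1 hx).2
    · exact hv
    · simp [hc]
    · simp

def pvNextHF {g : PySem.Dict Int (List Int)} {V : List Int} (dist' : PySem.Dict Int Int)
    (v : Int) {fr : List Int} (rest : List (Int × Int))
    (hg : ∀ k vs, g.get? k = some vs → ∀ x ∈ vs, x ∈ V)
    (hF : ∀ e ∈ (rest : List (Int × Int)), e.2 ∈ V) (hget : g.get? v = some fr) :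
    ∀ e ∈ pvNextF dist' v fr rest, e.2 ∈ V := by
  intro e he
  rcases List.mem_append.1 he with h | h
  · exact hF e h
  · rcases List.mem_map.1 h with ⟨f, hf, rfl⟩
    exact hg v fr hget f (List.mem_filter.1 hf).1

-- dist entries are never changed, only added
theorem pvBloop_dist_stable (g : PySem.Dict Int (List Int)) (V : List Int) (hg)
    (dist : PySem.Dict Int Int) (preds : PySem.Dict Int (List Int)) (F : List (Int × Int)) (hF)
    (x : Int) (hx : dist.contains x = true) :
    (pvBloop g V dist preds F hg hF).1.contains x = true ∧
    (pvBloop g V dist preds F hg hF).1.getD x 0 = dist.getD x 0 := by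
  match F, hF with
  | [], _ => rw [pvBloop_nil]; exact ⟨hx, rfl⟩
  | (u, v) :: rest, hF =>
    have hxs : (pvDistStep dist u v).contains x = true ∧
        (pvDistStep dist u v).getD x 0 = dist.getD x 0 := by
      simp only [pvDistStep]
      split
      · next h =>
        have hxv : x ≠ v := by
          intro he; subst he
          simp only [Bool.not_eq_true'] at h
          rw [hx] at h; cases h
        constructor
        · rw [PySem.Dict.contains_insert, hx]; simp
        · rw [PySem.Dict.getD_insert]; simp [hxv]
      · exact ⟨hx, rfl⟩
    match hget : g.get? v with
    | none =>
      rw [pvBloop_cons_none g V dist preds u v rest hget hg hF]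
      exact hxs
    | some fr =>
      rw [pvBloop_cons g V dist preds u v rest fr hget hg hF
        (pvNextHF _ _ _ hg (fun e he => hF e (List.mem_cons_of_mem _ he)) hget)]
      have := pvBloop_dist_stable g V hg (pvDistStep dist u v) (pvPredsStep dist preds u v)
        (pvNextF (pvDistStep dist u v) v fr rest)
        (pvNextHF _ _ _ hg (fun e he => hF e (List.mem_cons_of_mem _ he)) hget) x hxs.1
      exact ⟨this.1, this.2.trans hxs.2⟩
  termination_by (V.countP (fun x => !(dist.contains x)), F.countP (fun e => dist.contains e.2))
  decreasing_by
    exact pvMeasure_decStep V dist u v fr rest (hF (u, v) List.mem_cons_self)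

def pvAddNew (acc : List Int) (u : Int) : List Int := if u ∈ acc then acc else acc ++ [u]

def pvGenSrcs (dist : PySem.Dict Int Int) (v : Int) (F : List (Int × Int)) : List Int :=
  (F.filter (fun e => e.2 == v && (dist.getD e.1 0 + 1 == dist.getD v 0))).map Prod.fst

theorem pvGenSrcs_append (dist : PySem.Dict Int Int) (v : Int) (F₁ F₂ : List (Int × Int)) :
    pvGenSrcs dist v (F₁ ++ F₂) = pvGenSrcs dist v F₁ ++ pvGenSrcs dist v F₂ := by
  simp [pvGenSrcs]

theorem pvGenSrcs_eq_nil (dist : PySem.Dict Int Int) (v : Int) (F : List (Int × Int))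
    (h : ∀ e ∈ F, e.2 ≠ v) : pvGenSrcs dist v F = [] := by
  simp only [pvGenSrcs, List.map_eq_nil_iff, List.filter_eq_nil_iff]
  intro e he
  simp [h e he]

theorem pvGenSrcs_eq_nil' (dist : PySem.Dict Int Int) (v : Int) (F : List (Int × Int))
    (h : ∀ e ∈ F, e.2 = v → dist.getD e.1 0 + 1 ≠ dist.getD v 0) : pvGenSrcs dist v F = [] := by
  simp only [pvGenSrcs, List.map_eq_nil_iff, List.filter_eq_nil_iff]
  intro e he
  by_cases h2 : e.2 = v
  · simp [h2, h e he h2]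
  · simp [h2]

theorem pvGenSrcs_congr (dist dist' : PySem.Dict Int Int) (v : Int) (F : List (Int × Int))
    (h1 : ∀ e ∈ F, dist'.getD e.1 0 = dist.getD e.1 0) (h2 : dist'.getD v 0 = dist.getD v 0) :
    pvGenSrcs dist' v F = pvGenSrcs dist v F := by
  simp only [pvGenSrcs]
  rw [List.filter_congr]
  intro e he
  rw [h1 e he, h2]

theorem pvBloop_acct (g : PySem.Dict Int (List Int)) (V : List Int) (hg)
    (R : List Int) (hRsome : ∀ x ∈ R, (g.get? x).isSome = true)
    (hRcl : ∀ x ∈ R, ∀ fr, g.get? x = some fr → ∀ f ∈ fr, f ∈ R)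
    (dist : PySem.Dict Int Int) (preds : PySem.Dict Int (List Int)) (F : List (Int × Int)) (hF)
    (hFR : ∀ e ∈ F, e.2 ∈ R)
    (hsrc : ∀ e ∈ F, dist.contains e.1 = true) (v : Int) (hv : dist.contains v = true) :
    (pvBloop g V dist preds F hg hF).2.getD v [] =
      (pvGenSrcs dist v F).foldl pvAddNew (preds.getD v []) := by
  match F, hF with
  | [], _ => rw [pvBloop_nil]; simp [pvGenSrcs]
  | (prev, u) :: rest, hF =>
    match hget : g.get? u with
    | none =>
      exfalso
      have := hRsome u (hFR (prev, u) List.mem_cons_self)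
      rw [hget] at this; cases this
    | some fr =>
      have hFr : ∀ e ∈ rest, e.2 ∈ V := fun e he => hF e (List.mem_cons_of_mem _ he)
      have hFR' : ∀ e ∈ pvNextF (pvDistStep dist prev u) u fr rest, e.2 ∈ R := by
        intro e he
        rcases List.mem_append.1 he with h | h
        · exact hFR e (List.mem_cons_of_mem _ h)
        · rcases List.mem_map.1 h with ⟨f, hf, rfl⟩
          exact hRcl u (hFR (prev, u) List.mem_cons_self) fr hget f (List.mem_filter.1 hf).1
      rw [pvBloop_cons g V dist preds prev u rest fr hget hg hF (pvNextHF _ _ _ hg hFr hget)]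
      by_cases hcU : dist.contains u = true
      · -- target already discovered: dist unchanged
        have hd' : pvDistStep dist prev u = dist := by simp [pvDistStep, hcU]
        have hsrc' : ∀ e ∈ pvNextF (pvDistStep dist prev u) u fr rest,
            (pvDistStep dist prev u).contains e.1 = true := by
          intro e he
          rcases List.mem_append.1 he with h | h
          · rw [hd']; exact hsrc e (List.mem_cons_of_mem _ h)
          · rcases List.mem_map.1 h with ⟨f, _, rfl⟩
            rw [hd']; exact hcU
        have hv' : (pvDistStep dist prev u).contains v = true := by rw [hd']; exact hv
        rw [pvBloop_acct g V hg R hRsome hRcl _ _ _ (pvNextHF _ _ _ hg hFr hget) hFR' hsrc' v hv']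
        rw [hd']
        simp only [pvNextF]
        have hbatch : pvGenSrcs dist v ((fr.filter (fun f => !(dist.contains f))).map
            (fun f => (u, f))) = [] := by
          apply pvGenSrcs_eq_nil
          intro e he
          rcases List.mem_map.1 he with ⟨f, hf, rfl⟩
          intro hfv
          have hf2 : f = v := hfv
          have := (List.mem_filter.1 hf).2
          rw [hf2, hv] at this
          simp at this
        rw [pvGenSrcs_append, hbatch, List.append_nil]
        by_cases huv : u = v
        · subst huv
          by_cases hgen : (dist.getD prev 0 + 1 == dist.getD u 0) = true
          · have hgen' : (dist.getD u 0 == dist.getD prev 0 + 1) = true := by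
              rw [beq_iff_eq] at hgen ⊢; omega
            have hhead : pvGenSrcs dist u [(prev, u)] = [prev] := by
              simp only [pvGenSrcs, List.filter_cons, List.filter_nil]
              rw [show ((prev, u).2 == u) = true by simp]
              rw [show (dist.getD (prev, u).1 0 + 1 == dist.getD u 0) = true from hgen]
              simp
            rw [show ((prev, u) :: rest) = [(prev, u)] ++ rest by rfl, pvGenSrcs_append, hhead]
            simp only [List.singleton_append, List.foldl_cons]
            by_cases hmem : (preds.getD u []).contains prev = true
            · have hm' : prev ∈ preds.getD u [] := by simpa using hmem
              have hp' : pvPredsStep dist preds prev u = preds := by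
                simp [pvPredsStep, hcU, hgen', hm']
              rw [hp']
              congr 1
              simp only [pvAddNew]
              rw [if_pos (by simpa using hmem)]
            · have hp' : pvPredsStep dist preds prev u
                  = preds.insert u ((preds.getD u []) ++ [prev]) := by
                simp only [pvPredsStep]
                rw [Bool.not_eq_true] at hmem
                rw [if_neg (by simp [hcU]), if_pos (by simp [hgen']; simpa using hmem)]
              rw [hp', PySem.Dict.getD_insert_self]
              congr 1
              simp only [pvAddNew]
              rw [if_neg (by simpa using hmem)]
          · have hhead : pvGenSrcs dist u [(prev, u)] = [] := by
              simp [pvGenSrcs, hgen]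
            rw [show ((prev, u) :: rest) = [(prev, u)] ++ rest by rfl, pvGenSrcs_append, hhead,
              List.nil_append]
            have hp' : pvPredsStep dist preds prev u = preds := by
              have hne : (dist.getD u 0 == dist.getD prev 0 + 1) = false := by
                rw [beq_iff_eq] at hgen
                simp only [beq_eq_false_iff_ne, ne_eq]
                intro h; exact hgen (by omega)
              simp [pvPredsStep, hcU, hne]
            rw [hp']
        · have hhead : pvGenSrcs dist v [(prev, u)] = [] := by
            apply pvGenSrcs_eq_nil
            intro e he
            rcases List.mem_singleton.1 he with rfl
            simpa using huv
          rw [show ((prev, u) :: rest) = [(prev, u)] ++ rest by rfl, pvGenSrcs_append, hhead,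
            List.nil_append]
          have hp' : (pvPredsStep dist preds prev u).getD v [] = preds.getD v [] := by
            simp only [pvPredsStep]
            rw [if_neg (by simp [hcU])]
            split
            · rw [PySem.Dict.getD_insert, if_neg (fun h => huv h.symm)]
            · rfl
          rw [hp']
      · -- discovery of u : v ≠ u, nothing about v changes
        have huv : u ≠ v := by intro h; subst h; rw [hv] at hcU; exact hcU rfl
        rw [Bool.not_eq_true] at hcU
        have hd' : pvDistStep dist prev u = dist.insert u (dist.getD prev 0 + 1) := by
          simp [pvDistStep, hcU]
        have hsrc' : ∀ e ∈ pvNextF (pvDistStep dist prev u) u fr rest,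
            (pvDistStep dist prev u).contains e.1 = true := by
          intro e he
          rcases List.mem_append.1 he with h | h
          · rw [hd', PySem.Dict.contains_insert, hsrc e (List.mem_cons_of_mem _ h)]; simp
          · rcases List.mem_map.1 h with ⟨f, _, rfl⟩
            rw [hd', PySem.Dict.contains_insert]; simp
        have hv' : (pvDistStep dist prev u).contains v = true := by
          rw [hd', PySem.Dict.contains_insert, hv]; simp
        rw [pvBloop_acct g V hg R hRsome hRcl _ _ _ (pvNextHF _ _ _ hg hFr hget) hFR' hsrc' v hv']
        have hpred' : (pvPredsStep dist preds prev u).getD v [] = preds.getD v [] := by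
          simp only [pvPredsStep]
          rw [if_pos (by simp [hcU]), PySem.Dict.getD_insert, if_neg (fun h => huv h.symm)]
        rw [hpred']
        have hgv : (pvDistStep dist prev u).getD v 0 = dist.getD v 0 := by
          rw [hd', PySem.Dict.getD_insert, if_neg (fun h => huv h.symm)]
        simp only [pvNextF]
        rw [pvGenSrcs_append]
        have hbatch : pvGenSrcs (pvDistStep dist prev u) v
            ((fr.filter (fun f => !((pvDistStep dist prev u).contains f))).map
              (fun f => (u, f))) = [] := by
          apply pvGenSrcs_eq_nil
          intro e he
          rcases List.mem_map.1 he with ⟨f, hf, rfl⟩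
          intro hfv
          have hf2 : f = v := hfv
          have := (List.mem_filter.1 hf).2
          rw [hf2, hv'] at this
          simp at this
        rw [hbatch, List.append_nil]
        have hrest : pvGenSrcs (pvDistStep dist prev u) v rest = pvGenSrcs dist v rest := by
          apply pvGenSrcs_congr
          · intro e he
            have h1 : dist.contains e.1 = true := hsrc e (List.mem_cons_of_mem _ he)
            have : e.1 ≠ u := by intro hh; rw [hh, hcU] at h1; cases h1
            rw [hd', PySem.Dict.getD_insert, if_neg this]
          · exact hgv
        rw [hrest]
        have hhead : pvGenSrcs dist v [(prev, u)] = [] := by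
          apply pvGenSrcs_eq_nil
          intro e he
          rcases List.mem_singleton.1 he with rfl
          simpa using huv
        rw [show ((prev, u) :: rest) = [(prev, u)] ++ rest by rfl, pvGenSrcs_append, hhead,
          List.nil_append]
  termination_by (V.countP (fun x => !(dist.contains x)), F.countP (fun e => dist.contains e.2))
  decreasing_by
    all_goals exact pvMeasure_decStep V dist prev u fr rest (hF (prev, u) List.mem_cons_self)

structure pvBState (s : Int) (dist : PySem.Dict Int Int)
    (preds : PySem.Dict Int (List Int)) : Prop where
  nodup : dist.keys.Nodup
  head : dist.keys.head? = some s
  scont : dist.contains s = true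
  dzero : dist.getD s 0 = 0
  dpos : ∀ v, dist.contains v = true → 0 ≤ dist.getD v 0
  pKeys : ∀ v, preds.contains v = true → dist.contains v = true ∧ v ≠ s
  pNE : ∀ v, dist.contains v = true → v ≠ s → preds.getD v [] ≠ []
  pMem : ∀ v u, u ∈ preds.getD v [] → dist.contains u = true ∧
    dist.getD u 0 + 1 = dist.getD v 0 ∧ pvBefore dist.keys u v
  pND : ∀ v, (preds.getD v []).Nodup

def pvBFr (dist : PySem.Dict Int Int) (F : List (Int × Int)) : Prop :=
  ∀ e ∈ F, dist.contains e.1 = true ∧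
    (dist.contains e.2 = true → dist.getD e.1 0 + 1 = dist.getD e.2 0 →
      pvBefore dist.keys e.1 e.2)

theorem pvKeys_append_of_not_contains (dist : PySem.Dict Int Int) (v : Int) (w : Int)
    (hc : dist.contains v = false) : (dist.insert v w).keys = dist.keys ++ [v] := by
  rw [PySem.Dict.keys_insert_of_not_contains]
  exact hc

theorem pvBStep_state (s : Int) (dist : PySem.Dict Int Int) (preds : PySem.Dict Int (List Int))
    (prev u : Int) (hst : pvBState s dist preds)
    (hsrc : dist.contains prev = true)
    (hbef : dist.contains u = true → dist.getD prev 0 + 1 = dist.getD u 0 →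
      pvBefore dist.keys prev u) :
    pvBState s (pvDistStep dist prev u) (pvPredsStep dist preds prev u) := by
  by_cases hc : dist.contains u = true
  · have hd : pvDistStep dist prev u = dist := by simp [pvDistStep, hc]
    rw [hd]
    simp only [pvPredsStep]
    rw [if_neg (by simp [hc])]
    split
    · next hcond =>
      simp only [Bool.and_eq_true] at hcond
      have hgen : dist.getD u 0 = dist.getD prev 0 + 1 := beq_iff_eq.1 hcond.1
      have hnew : prev ∉ preds.getD u [] := by simpa using hcond.2
      have hus : u ≠ s := by
        intro he; subst he
        rw [hst.dzero] at hgen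
        have := hst.dpos prev hsrc
        omega
      constructor
      · exact hst.nodup
      · exact hst.head
      · exact hst.scont
      · exact hst.dzero
      · exact hst.dpos
      · intro v hv
        rw [PySem.Dict.contains_insert] at hv
        rcases Bool.or_eq_true_iff.1 hv with h | h
        · rw [beq_iff_eq] at h; subst h; exact ⟨hc, hus⟩
        · exact hst.pKeys v h
      · intro v hv hvs
        by_cases hvu : v = u
        · subst hvu
          rw [PySem.Dict.getD_insert_self]
          simp
        · rw [PySem.Dict.getD_insert, if_neg hvu]
          exact hst.pNE v hv hvs
      · intro v w hw
        by_cases hvu : v = u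
        · subst hvu
          rw [PySem.Dict.getD_insert_self] at hw
          rcases List.mem_append.1 hw with h | h
          · exact hst.pMem _ w h
          · rcases List.mem_singleton.1 h with rfl
            exact ⟨hsrc, by omega, hbef hc (by omega)⟩
        · rw [PySem.Dict.getD_insert, if_neg hvu] at hw
          exact hst.pMem v w hw
      · intro v
        by_cases hvu : v = u
        · subst hvu
          rw [PySem.Dict.getD_insert_self]
          refine List.Nodup.append (hst.pND _) (List.nodup_singleton _) ?_
          intro a ha hb
          rcases List.mem_singleton.1 hb with rfl
          exact hnew ha
        · rw [PySem.Dict.getD_insert, if_neg hvu]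
          exact hst.pND v
    · exact hst
  · -- discovery of u
    rw [Bool.not_eq_true] at hc
    have hd : pvDistStep dist prev u = dist.insert u (dist.getD prev 0 + 1) := by
      simp [pvDistStep, hc]
    have hp : pvPredsStep dist preds prev u = preds.insert u [prev] := by
      simp [pvPredsStep, hc]
    have hus : u ≠ s := by
      intro he; subst he; rw [hst.scont] at hc; cases hc
    have hkeys : (dist.insert u (dist.getD prev 0 + 1)).keys = dist.keys ++ [u] :=
      pvKeys_append_of_not_contains dist u _ hc
    have hmemk : ∀ x, dist.contains x = true → x ≠ u := by
      intro x hx he; subst he; rw [hx] at hc; cases hc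
    rw [hd, hp]
    constructor
    · rw [hkeys]
      apply List.Nodup.append hst.nodup (List.nodup_singleton _)
      intro a ha hb
      rcases List.mem_singleton.1 hb with rfl
      rw [← PySem.Dict.contains_iff_mem_keys] at ha
      rw [ha] at hc; cases hc
    · rw [hkeys]
      have : dist.keys ≠ [] := by
        intro h
        have hh := hst.head
        rw [h] at hh
        simp at hh
      rw [List.head?_append_of_ne_nil _ this]
      exact hst.head
    · rw [PySem.Dict.contains_insert, hst.scont]; simp
    · rw [PySem.Dict.getD_insert, if_neg (hmemk s hst.scont)]
      exact hst.dzero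
    · intro v hv
      rw [PySem.Dict.contains_insert] at hv
      rcases Bool.or_eq_true_iff.1 hv with h | h
      · rw [beq_iff_eq] at h; subst h
        rw [PySem.Dict.getD_insert_self]
        have := hst.dpos prev hsrc
        omega
      · rw [PySem.Dict.getD_insert, if_neg (hmemk v h)]
        exact hst.dpos v h
    · intro v hv
      rw [PySem.Dict.contains_insert] at hv
      rcases Bool.or_eq_true_iff.1 hv with h | h
      · rw [beq_iff_eq] at h; subst h
        constructor
        · rw [PySem.Dict.contains_insert]; simp
        · exact hus
      · have := hst.pKeys v h
        exact ⟨by rw [PySem.Dict.contains_insert, this.1]; simp, this.2⟩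
    · intro v hv hvs
      by_cases hvu : v = u
      · subst hvu
        rw [PySem.Dict.getD_insert_self]
        simp
      · rw [PySem.Dict.getD_insert, if_neg hvu]
        rw [PySem.Dict.contains_insert] at hv
        rcases Bool.or_eq_true_iff.1 hv with h | h
        · rw [beq_iff_eq] at h; exact absurd h hvu
        · exact hst.pNE v h hvs
    · intro v w hw
      by_cases hvu : v = u
      · subst hvu
        rw [PySem.Dict.getD_insert_self] at hw
        rcases List.mem_singleton.1 hw with rfl
        refine ⟨by rw [PySem.Dict.contains_insert, hsrc]; simp, ?_, ?_⟩
        · rw [PySem.Dict.getD_insert, if_neg (hmemk w hsrc), PySem.Dict.getD_insert_self]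
        · rw [hkeys]
          apply pvBefore_append_last
          rw [← PySem.Dict.contains_iff_mem_keys]
          exact hsrc
      · rw [PySem.Dict.getD_insert, if_neg hvu] at hw
        have h3 := hst.pMem v w hw
        refine ⟨by rw [PySem.Dict.contains_insert, h3.1]; simp, ?_, ?_⟩
        · rw [PySem.Dict.getD_insert, if_neg (hmemk w h3.1),
            PySem.Dict.getD_insert, if_neg hvu]
          exact h3.2.1
        · rw [hkeys]
          exact pvBefore_append _ _ _ _ h3.2.2
    · intro v
      by_cases hvu : v = u
      · subst hvu
        rw [PySem.Dict.getD_insert_self]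
        exact List.nodup_singleton _
      · rw [PySem.Dict.getD_insert, if_neg hvu]
        exact hst.pND v

theorem pvBStep_fr (dist : PySem.Dict Int Int) (prev u : Int) (fr : List Int)
    (rest : List (Int × Int))
    (hFr : pvBFr dist ((prev, u) :: rest)) :
    pvBFr (pvDistStep dist prev u) (pvNextF (pvDistStep dist prev u) u fr rest) := by
  intro e he
  rcases List.mem_append.1 he with h | h
  · -- an old edge
    have hold := hFr e (List.mem_cons_of_mem _ h)
    by_cases hc : dist.contains u = true
    · rw [show pvDistStep dist prev u = dist by simp [pvDistStep, hc]]
      exact hold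
    · rw [Bool.not_eq_true] at hc
      have hd : pvDistStep dist prev u = dist.insert u (dist.getD prev 0 + 1) := by
        simp [pvDistStep, hc]
      have hkeys : (dist.insert u (dist.getD prev 0 + 1)).keys = dist.keys ++ [u] :=
        pvKeys_append_of_not_contains dist u _ hc
      rw [hd]
      have hne1 : e.1 ≠ u := by
        intro he
        have h5 := hold.1
        rw [he] at h5
        rw [h5] at hc; cases hc
      constructor
      · rw [PySem.Dict.contains_insert, hold.1]; simp
      · intro h2 h4
        rw [PySem.Dict.contains_insert] at h2
        rcases Bool.or_eq_true_iff.1 h2 with h3 | h3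
        · rw [beq_iff_eq] at h3
          rw [hkeys, h3]
          apply pvBefore_append_last
          rw [← PySem.Dict.contains_iff_mem_keys]
          exact hold.1
        · have hne2 : e.2 ≠ u := by
            intro he
            rw [he] at h3
            rw [h3] at hc; cases hc
          rw [PySem.Dict.getD_insert, if_neg hne1, PySem.Dict.getD_insert, if_neg hne2] at h4
          rw [hkeys]
          exact pvBefore_append _ _ _ _ (hold.2 h3 h4)
  · -- a new edge (u, f) with f undiscovered
    rcases List.mem_map.1 h with ⟨f, hf, rfl⟩
    have hsrc := (hFr (prev, u) List.mem_cons_self).1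
    constructor
    · by_cases hc : dist.contains u = true
      · rw [show pvDistStep dist prev u = dist by simp [pvDistStep, hc]]
        exact hc
      · rw [Bool.not_eq_true] at hc
        rw [show pvDistStep dist prev u = dist.insert u (dist.getD prev 0 + 1) by
          simp [pvDistStep, hc]]
        rw [PySem.Dict.contains_insert]; simp
    · intro h2 _
      have := (List.mem_filter.1 hf).2
      rw [h2] at this
      simp at this

theorem pvBloop_final_state (g : PySem.Dict Int (List Int)) (V : List Int) (hg) (s : Int)
    (dist : PySem.Dict Int Int) (preds : PySem.Dict Int (List Int)) (F : List (Int × Int)) (hF)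
    (hst : pvBState s dist preds) (hFr : pvBFr dist F) :
    pvBState s (pvBloop g V dist preds F hg hF).1 (pvBloop g V dist preds F hg hF).2 := by
  match F, hF with
  | [], _ => rw [pvBloop_nil]; exact hst
  | (prev, u) :: rest, hF =>
    have hE := hFr (prev, u) List.mem_cons_self
    have hst' := pvBStep_state s dist preds prev u hst hE.1 hE.2
    match hget : g.get? u with
    | none =>
      rw [pvBloop_cons_none g V dist preds prev u rest hget hg hF]
      exact hst'
    | some fr =>
      have hFr' := pvBStep_fr dist prev u fr rest hFr
      rw [pvBloop_cons g V dist preds prev u rest fr hget hg hF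
        (pvNextHF _ _ _ hg (fun e he => hF e (List.mem_cons_of_mem _ he)) hget)]
      exact pvBloop_final_state g V hg s _ _ _ _ hst' hFr'
  termination_by (V.countP (fun x => !(dist.contains x)), F.countP (fun e => dist.contains e.2))
  decreasing_by
    exact pvMeasure_decStep V dist prev u fr rest (hF (prev, u) List.mem_cons_self)

theorem pvHead?_eq_cons {l : List Int} {s : Int} (h : l.head? = some s) :
    l = s :: l.drop 1 := by
  cases l with
  | nil => simp at h
  | cons a t => simp at h; simp [h]

theorem pvFlatMap_congr {α β : Type} (l : List α) (f g : α → List β)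
    (h : ∀ x ∈ l, f x = g x) : l.flatMap f = l.flatMap g := by
  induction l with
  | nil => rfl
  | cons a t ih =>
    simp only [List.flatMap_cons]
    rw [h a List.mem_cons_self, ih (fun x hx => h x (List.mem_cons_of_mem _ hx))]

theorem pvRecon_stable (preds : PySem.Dict Int (List Int))
    (D : PySem.Dict Int (List (List Int))) (l : List Int) (x : Int) (hx : x ∉ l) :
    (l.foldl (fun paths v => paths.insert v
        ((preds.getD v []).flatMap (fun u => (paths.getD u []).map (fun p => p ++ [v])))) D).getD
      x [] = D.getD x [] := by
  induction l generalizing D with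
  | nil => rfl
  | cons a t ih =>
    simp only [List.foldl_cons]
    rw [ih _ (fun h => hx (List.mem_cons_of_mem _ h))]
    rw [PySem.Dict.getD_insert, if_neg (fun h => hx (by rw [h]; exact List.mem_cons_self))]

theorem pvRecon_keys (preds : PySem.Dict Int (List Int)) (s : Int) (tl : List Int)
    (hnd : (s :: tl).Nodup) :
    (pvRecon preds s tl).keys = s :: tl := by
  simp only [pvRecon]
  rw [PySem.Dict.keys_foldl_insert]
  have h1 : ((PySem.Dict.empty (κ := Int) (ν := List (List Int))).insert s [[]]).keys = [s] := by
    rfl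
  rw [h1]
  have hdisj : ∀ x ∈ tl, x ∉ [s] := by
    intro x hx hmem
    rcases List.mem_singleton.1 hmem with rfl
    exact (List.nodup_cons.1 hnd).1 hx
  have := PySem.Set.update_eq_append_of_disjoint (s := [s]) (xs := tl)
    ((List.nodup_cons.1 hnd).2) hdisj
  simpa using this

theorem pvRecon_getD_s (preds : PySem.Dict Int (List Int)) (s : Int) (tl : List Int)
    (hs : s ∉ tl) : (pvRecon preds s tl).getD s [] = [[]] := by
  simp only [pvRecon]
  rw [pvRecon_stable _ _ _ _ hs, PySem.Dict.getD_insert_self]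

theorem pvRecon_getD_mem (preds : PySem.Dict Int (List Int)) (s : Int) (tl : List Int)
    (hnd : (s :: tl).Nodup) (v : Int) (hv : v ∈ tl)
    (hpre : ∀ u ∈ preds.getD v [], pvBefore (s :: tl) u v) :
    (pvRecon preds s tl).getD v [] =
      (preds.getD v []).flatMap
        (fun u => ((pvRecon preds s tl).getD u []).map (fun p => p ++ [v])) := by
  obtain ⟨l1, l2, rfl⟩ := List.append_of_mem hv
  have htl : (l1 ++ v :: l2).Nodup := (List.nodup_cons.1 hnd).2
  have hvl2 : v ∉ l2 := by
    rw [List.nodup_append] at htl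
    exact fun h => (List.nodup_cons.1 htl.2.1).1 h
  have hmemu : ∀ u ∈ preds.getD v [], u ∈ s :: l1 := by
    intro u hu
    have hb := hpre u hu
    have : (s :: (l1 ++ v :: l2)) = (s :: l1) ++ v :: l2 := by simp
    rw [this] at hb
    exact pvBefore_split (by rw [← this]; exact hnd) hb
  simp only [pvRecon, List.foldl_append, List.foldl_cons]
  set D1 := l1.foldl (fun paths v => paths.insert v
      ((preds.getD v []).flatMap (fun u => (paths.getD u []).map (fun p => p ++ [v]))))
      ((PySem.Dict.empty).insert s [[]]) with hD1
  rw [pvRecon_stable _ _ _ _ hvl2, PySem.Dict.getD_insert_self]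
  apply pvFlatMap_congr
  intro u hu
  have humem := hmemu u hu
  have htl' := List.nodup_append.1 htl
  have huv : u ≠ v := by
    intro he; subst he
    rcases List.mem_cons.1 humem with h | h
    · exact (List.nodup_cons.1 hnd).1 (by rw [← h]; exact hv)
    · exact htl'.2.2 u h u List.mem_cons_self rfl
  have hul2 : u ∉ l2 := by
    intro he
    rcases List.mem_cons.1 humem with h | h
    · refine (List.nodup_cons.1 hnd).1 ?_
      rw [h] at he
      exact List.mem_append_right _ (List.mem_cons_of_mem _ he)
    · exact htl'.2.2 u h u (List.mem_cons_of_mem _ he) rfl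
  congr 1
  rw [pvRecon_stable _ _ _ _ hul2, PySem.Dict.getD_insert, if_neg huv]

def pvPathsOf (FD : PySem.Dict Int Int) (FP : PySem.Dict Int (List Int)) (s v : Int) :
    List (List Int) :=
  (pvRecon FP s (FD.keys.drop 1)).getD v []

theorem pvFlatMap_ne_nil {α β : Type} (l : List α) (f : α → List β) (hne : l ≠ [])
    (h : ∀ x ∈ l, f x ≠ []) : l.flatMap f ≠ [] := by
  cases l with
  | nil => exact absurd rfl hne
  | cons a t =>
    simp only [List.flatMap_cons]
    intro hc
    rcases List.append_eq_nil_iff.1 hc with ⟨h1, _⟩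
    exact h a List.mem_cons_self h1

theorem pvPaths_facts (FD : PySem.Dict Int Int) (FP : PySem.Dict Int (List Int)) (s : Int)
    (hst : pvBState s FD FP) :
    ∀ n : Nat, ∀ v : Int, FD.keys[n]? = some v →
      pvPathsOf FD FP s v ≠ [] ∧
      (∀ p ∈ pvPathsOf FD FP s v, (p.length : Int) = FD.getD v 0) ∧
      (v ≠ s → ∀ p ∈ pvPathsOf FD FP s v, p.getLast? = some v) ∧
      (v = s → pvPathsOf FD FP s v = [[]]) ∧
      (pvPathsOf FD FP s v).Nodup := by
  intro n
  induction n using Nat.strong_induction_on with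
  | _ n ih =>
    intro v hv
    have hkeys : FD.keys = s :: FD.keys.drop 1 := pvHead?_eq_cons hst.head
    set tl := FD.keys.drop 1 with htl
    have hnd : (s :: tl).Nodup := by rw [← hkeys]; exact hst.nodup
    have hsn : s ∉ tl := (List.nodup_cons.1 hnd).1
    match n, hv with
    | 0, hv =>
      have hvs : v = s := by
        rw [hkeys] at hv; simp at hv; exact hv.symm
      rw [hvs]
      have hps : pvPathsOf FD FP s s = [[]] := by
        simp only [pvPathsOf, ← htl]
        exact pvRecon_getD_s FP s tl hsn
      refine ⟨by rw [hps]; simp, ?_, fun h => absurd rfl h, fun _ => hps, by rw [hps]; simp⟩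
      intro p hp
      rw [hps] at hp
      rcases List.mem_singleton.1 hp with rfl
      simp [hst.dzero]
    | (m + 1), hv =>
      have hvtl : v ∈ tl := by
        rw [hkeys] at hv
        rw [pvGetElem?_cons_succ] at hv
        exact List.mem_of_getElem? hv
      have hvs : v ≠ s := by
        intro he; subst he; exact hsn hvtl
      have hcont : FD.contains v = true := by
        rw [PySem.Dict.contains_iff_mem_keys, hkeys]
        exact List.mem_cons_of_mem _ hvtl
      have hpre : ∀ u ∈ FP.getD v [], pvBefore (s :: tl) u v := by
        intro u hu
        have := (hst.pMem v u hu).2.2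
        rwa [hkeys] at this
      have hval : pvPathsOf FD FP s v = (FP.getD v []).flatMap
          (fun u => (pvPathsOf FD FP s u).map (fun p => p ++ [v])) := by
        simp only [pvPathsOf, ← htl]
        exact pvRecon_getD_mem FP s tl hnd v hvtl hpre
      have hpredix : ∀ u ∈ FP.getD v [], ∃ i : Nat, i < m + 1 ∧ FD.keys[i]? = some u := by
        intro u hu
        obtain ⟨i, j, hij, hiu, hjv⟩ := hpre u hu
        rw [← hkeys] at hiu hjv
        have hjlen : j < FD.keys.length := (List.getElem?_eq_some_iff.1 hjv).1
        have hnlen : m + 1 < FD.keys.length := (List.getElem?_eq_some_iff.1 hv).1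
        have hjn : j = m + 1 := by
          have h1 : FD.keys[j]'hjlen = v := by
            have := List.getElem?_eq_getElem hjlen; rw [this] at hjv; exact Option.some.inj hjv
          have h2 : FD.keys[m + 1]'hnlen = v := by
            have := List.getElem?_eq_getElem hnlen; rw [this] at hv; exact Option.some.inj hv
          exact (List.Nodup.getElem_inj_iff hst.nodup).1 (h1.trans h2.symm)
        exact ⟨i, by omega, hiu⟩
      have hIH : ∀ u ∈ FP.getD v [],
          pvPathsOf FD FP s u ≠ [] ∧
          (∀ p ∈ pvPathsOf FD FP s u, (p.length : Int) = FD.getD u 0) ∧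
          (u ≠ s → ∀ p ∈ pvPathsOf FD FP s u, p.getLast? = some u) ∧
          (u = s → pvPathsOf FD FP s u = [[]]) ∧
          (pvPathsOf FD FP s u).Nodup := by
        intro u hu
        obtain ⟨i, hilt, hikey⟩ := hpredix u hu
        exact ih i hilt u hikey
      have hFPne : FP.getD v [] ≠ [] := hst.pNE v hcont hvs
      refine ⟨?_, ?_, ?_, fun h => absurd h hvs, ?_⟩
      · rw [hval]
        apply pvFlatMap_ne_nil _ _ hFPne
        intro u hu
        simp only [ne_eq, List.map_eq_nil_iff]
        exact (hIH u hu).1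
      · rw [hval]
        intro p hp
        rcases List.mem_flatMap.1 hp with ⟨u, hu, hpu⟩
        rcases List.mem_map.1 hpu with ⟨q, hq, rfl⟩
        have hlen := (hIH u hu).2.1 q hq
        have hcompat := (hst.pMem v u hu).2.1
        simp only [List.length_append, List.length_cons, List.length_nil]
        push_cast
        omega
      · rw [hval]
        intro _ p hp
        rcases List.mem_flatMap.1 hp with ⟨u, hu, hpu⟩
        rcases List.mem_map.1 hpu with ⟨q, hq, rfl⟩
        exact List.getLast?_concat
      · rw [hval]
        rw [List.nodup_flatMap]
        constructor
        · intro u hu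
          apply List.Nodup.map ?_ (hIH u hu).2.2.2.2
          intro p q hpq
          simpa using hpq
        · refine List.Pairwise.imp_of_mem ?_ (hst.pND v)
          intro u1 u2 h1 h2 hne
          simp only [Function.onFun]
          intro p hp1 hp2
          rcases List.mem_map.1 hp1 with ⟨q1, hq1, rfl⟩
          rcases List.mem_map.1 hp2 with ⟨q2, hq2, heq⟩
          have hq12 : q2 = q1 := by simpa using heq
          subst hq12
          by_cases h1s : u1 = s
          · have hq1' := hq1
            rw [(hIH u1 h1).2.2.2.1 h1s] at hq1'
            have hq0 : q2 = [] := List.mem_singleton.1 hq1'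
            have h2s : u2 ≠ s := fun h => hne (h1s.trans h.symm)
            have hlast := (hIH u2 h2).2.2.1 h2s q2 hq2
            rw [hq0] at hlast
            simp at hlast
          · have hl1 := (hIH u1 h1).2.2.1 h1s q2 hq1
            by_cases h2s : u2 = s
            · have hq2' := hq2
              rw [(hIH u2 h2).2.2.2.1 h2s] at hq2'
              have hq0 : q2 = [] := List.mem_singleton.1 hq2'
              rw [hq0] at hl1
              simp at hl1
            · have hl2 := (hIH u2 h2).2.2.1 h2s q2 hq2
              rw [hl1] at hl2
              exact hne (Option.some.inj hl2)

theorem pvBefore_rel {l : List Int} {R : Int → Int → Prop} (hp : List.Pairwise R l)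
    {a b : Int} (h : pvBefore l a b) : R a b := by
  obtain ⟨i, j, hij, ha, hb⟩ := h
  have hi : i < l.length := (List.getElem?_eq_some_iff.1 ha).1
  have hj : j < l.length := (List.getElem?_eq_some_iff.1 hb).1
  have h1 : l[i]'hi = a := by
    have := List.getElem?_eq_getElem hi; rw [this] at ha; exact Option.some.inj ha
  have h2 : l[j]'hj = b := by
    have := List.getElem?_eq_getElem hj; rw [this] at hb; exact Option.some.inj hb
  have := List.pairwise_iff_getElem.1 hp i j hi hj hij
  rwa [h1, h2] at this

theorem pvInsert_getD_self {ν : Type} (d : PySem.Dict Int ν) (k : Int) (dflt : ν)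
    (hnd : d.keys.Nodup) (hc : d.contains k = true) : d.insert k (d.getD k dflt) = d := by
  cases h : d.get? k with
  | none =>
    rw [PySem.Dict.contains_eq_isSome_get?, h] at hc
    cases hc
  | some w =>
    have hgd : d.getD k dflt = w := by
      rw [PySem.Dict.getD_eq_get?_getD, h]
      rfl
    rw [hgd]
    exact pvInsert_self_value d k w hnd h

def pvNoTgtBefore (F : List (Int × Int)) (i : Nat) (v : Int) : Prop :=
  ∀ j : Nat, j < i → ∀ q, F[j]? = some q → q.2 ≠ v

structure pvJInv (g : PySem.Dict Int (List Int)) (s : Int)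
    (FD : PySem.Dict Int Int) (FP : PySem.Dict Int (List Int))
    (P : PySem.Dict Int (List (List Int))) (dist : PySem.Dict Int Int)
    (preds : PySem.Dict Int (List Int)) (F : List (Int × Int)) : Prop where
  bst : pvBState s dist preds
  bfr : pvBFr dist F
  keysEq : P.keys = dist.keys
  pbase : P.getD s [] = [[]]
  pval : ∀ v, dist.contains v = true → v ≠ s →
    P.getD v [] = (preds.getD v []).flatMap
      (fun u => (pvPathsOf FD FP s u).map (fun p => p ++ [v]))
  ftgt : ∀ e ∈ F, ∃ fr, g.get? e.1 = some fr ∧ e.2 ∈ fr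
  ple : ∀ e ∈ F, dist.contains e.2 = true → dist.getD e.2 0 ≤ dist.getD e.1 0 + 1
  pend : ∀ u, dist.contains u = true → ∀ fr, g.get? u = some fr →
    ∀ f ∈ fr, dist.contains f = false → (u, f) ∈ F
  nio : ∀ i j : Nat, i ≤ j → ∀ p q, F[i]? = some p → F[j]? = some q → q.2 = p.1 →
    dist.getD q.1 0 + 1 ≠ dist.getD p.1 0
  first16 : ∀ i u v, F[i]? = some (u, v) → dist.contains v = false → pvNoTgtBefore F i v →
    ∀ x, dist.contains x = true → dist.getD x 0 ≤ dist.getD u 0 + 1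
  firstSame : ∀ i u v, F[i]? = some (u, v) → dist.contains v = false → pvNoTgtBefore F i v →
    ∀ e ∈ F, e.2 = v → dist.getD u 0 ≤ dist.getD e.1 0
  firstKey : ∀ i u v, F[i]? = some (u, v) → dist.contains v = false → pvNoTgtBefore F i v →
    ∀ w, dist.contains w = true → ∀ frw, g.get? w = some frw → v ∈ frw →
      (u = w ∨ pvBefore dist.keys u w)
  firstOrd : ∀ i j : Nat, ∀ u v u' v', i ≤ j → F[i]? = some (u, v) → F[j]? = some (u', v') →
    dist.contains v = false → dist.contains v' = false →
    pvNoTgtBefore F i v → pvNoTgtBefore F j v' →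
    dist.getD u 0 ≤ dist.getD u' 0
  mono : List.Pairwise (fun a b => dist.getD a 0 ≤ dist.getD b 0) dist.keys

theorem pvPaths_s (FD : PySem.Dict Int Int) (FP : PySem.Dict Int (List Int)) (s : Int)
    (hfst : pvBState s FD FP) : pvPathsOf FD FP s s = [[]] := by
  have hkeys : FD.keys = s :: FD.keys.drop 1 := pvHead?_eq_cons hfst.head
  have hnds : (s :: FD.keys.drop 1).Nodup := by rw [← hkeys]; exact hfst.nodup
  simp only [pvPathsOf]
  exact pvRecon_getD_s FP s _ (List.nodup_cons.1 hnds).1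

theorem pvPaths_eq (FD : PySem.Dict Int Int) (FP : PySem.Dict Int (List Int)) (s : Int)
    (hfst : pvBState s FD FP) (v : Int) (hv : FD.contains v = true) (hvs : v ≠ s) :
    pvPathsOf FD FP s v = (FP.getD v []).flatMap
      (fun u => (pvPathsOf FD FP s u).map (fun p => p ++ [v])) := by
  have hkeys : FD.keys = s :: FD.keys.drop 1 := pvHead?_eq_cons hfst.head
  have hnds : (s :: FD.keys.drop 1).Nodup := by rw [← hkeys]; exact hfst.nodup
  simp only [pvPathsOf]
  apply pvRecon_getD_mem FP s (FD.keys.drop 1) hnds v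
  · have : v ∈ FD.keys := by rwa [← PySem.Dict.contains_iff_mem_keys]
    rw [hkeys] at this
    rcases List.mem_cons.1 this with h | h
    · exact absurd h hvs
    · exact h
  · intro u hu
    have := (hfst.pMem v u hu).2.2
    rwa [hkeys] at this

theorem pvPaths_facts_mem (FD : PySem.Dict Int Int) (FP : PySem.Dict Int (List Int)) (s : Int)
    (hfst : pvBState s FD FP) (u : Int) (hu : FD.contains u = true) :
    pvPathsOf FD FP s u ≠ [] ∧
    (∀ p ∈ pvPathsOf FD FP s u, (p.length : Int) = FD.getD u 0) ∧
    (u ≠ s → ∀ p ∈ pvPathsOf FD FP s u, p.getLast? = some u) ∧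
    (u = s → pvPathsOf FD FP s u = [[]]) ∧
    (pvPathsOf FD FP s u).Nodup := by
  have : u ∈ FD.keys := by rwa [← PySem.Dict.contains_iff_mem_keys]
  rcases pvMem_iff_getElem?.1 this with ⟨n, hn⟩
  exact pvPaths_facts FD FP s hfst n u hn

theorem pvPaths_disjoint (FD : PySem.Dict Int Int) (FP : PySem.Dict Int (List Int)) (s : Int)
    (hfst : pvBState s FD FP) (u1 u2 : Int) (h1 : FD.contains u1 = true)
    (h2 : FD.contains u2 = true) (p : List Int)
    (hp1 : p ∈ pvPathsOf FD FP s u1) (hp2 : p ∈ pvPathsOf FD FP s u2) : u1 = u2 := by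
  by_contra hne
  have hf1 := pvPaths_facts_mem FD FP s hfst u1 h1
  have hf2 := pvPaths_facts_mem FD FP s hfst u2 h2
  by_cases h1s : u1 = s
  · have h2s : u2 ≠ s := fun h => hne (h1s.trans h.symm)
    have hp1' := hp1
    rw [hf1.2.2.2.1 h1s] at hp1'
    have hp0 : p = [] := List.mem_singleton.1 hp1'
    have := hf2.2.2.1 h2s p hp2
    rw [hp0] at this
    simp at this
  · have hl1 := hf1.2.2.1 h1s p hp1
    by_cases h2s : u2 = s
    · have hp2' := hp2
      rw [hf2.2.2.2.1 h2s] at hp2'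
      have hp0 : p = [] := List.mem_singleton.1 hp2'
      rw [hp0] at hl1
      simp at hl1
    · have hl2 := hf2.2.2.1 h2s p hp2
      rw [hl1] at hl2
      exact hne (Option.some.inj hl2)

theorem pvJInv_step (g : PySem.Dict Int (List Int)) (s : Int)
    (FD : PySem.Dict Int Int) (FP : PySem.Dict Int (List Int))
    (P : PySem.Dict Int (List (List Int))) (dist : PySem.Dict Int Int)
    (preds : PySem.Dict Int (List Int)) (prev v0 : Int) (rest : List (Int × Int))
    (fr : List Int) (hget : g.get? v0 = some fr)
    (hinv : pvJInv g s FD FP P dist preds ((prev, v0) :: rest))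
    (hfst : pvBState s FD FP)
    (hstab : ∀ x, dist.contains x = true → FD.contains x = true ∧ FD.getD x 0 = dist.getD x 0)
    (hacct : ∀ v, dist.contains v = true →
      FP.getD v [] = (pvGenSrcs dist v ((prev, v0) :: rest)).foldl pvAddNew (preds.getD v [])) :
    pvJInv g s FD FP (pvAStep P prev v0) (pvDistStep dist prev v0)
      (pvPredsStep dist preds prev v0)
      (pvNextF (pvDistStep dist prev v0) v0 fr rest) := by
  have hhead := hinv.bfr (prev, v0) List.mem_cons_self
  have hsrcprev : dist.contains prev = true := hhead.1
  have hPcont : ∀ x : Int, P.contains x = dist.contains x := by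
    intro x
    rw [PySem.Dict.contains_eq_decide_mem_keys, PySem.Dict.contains_eq_decide_mem_keys,
      hinv.keysEq]
  have hPrevComplete : preds.getD prev [] = FP.getD prev [] := by
    have hnil : pvGenSrcs dist prev ((prev, v0) :: rest) = [] := by
      apply pvGenSrcs_eq_nil'
      intro e he h2
      rcases pvMem_iff_getElem?.1 he with ⟨j, hj⟩
      exact hinv.nio 0 j (Nat.zero_le _) (prev, v0) e rfl hj h2
    rw [hacct prev hsrcprev, hnil, List.foldl_nil]
  have hPathsPrev : P.getD prev [] = pvPathsOf FD FP s prev := by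
    by_cases hps : prev = s
    · rw [hps, hinv.pbase, pvPaths_s FD FP s hfst]
    · rw [hinv.pval prev hsrcprev hps, hPrevComplete,
        ← pvPaths_eq FD FP s hfst prev (hstab prev hsrcprev).1 hps]
  have hrest2F : ∀ {i : Nat} {p : Int × Int}, rest[i]? = some p →
      ((prev, v0) :: rest)[i + 1]? = some p := by
    intro i p hp
    simpa using hp
  have hFi : ∀ {i : Nat} {p : Int × Int} {batch : List (Int × Int)},
      (rest ++ batch)[i]? = some p →
      (i < rest.length ∧ rest[i]? = some p) ∨
      (rest.length ≤ i ∧ batch[i - rest.length]? = some p) := by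
    intro i p batch hp
    by_cases h : i < rest.length
    · left
      refine ⟨h, ?_⟩
      rwa [List.getElem?_append_left h] at hp
    · right
      push_neg at h
      refine ⟨h, ?_⟩
      rwa [List.getElem?_append_right h] at hp
  have hNoTgt2F : ∀ (batch : List (Int × Int)) (i : Nat) (v : Int), v ≠ v0 →
      pvNoTgtBefore (rest ++ batch) i v → pvNoTgtBefore ((prev, v0) :: rest) (i + 1) v := by
    intro batch i v hne hnb j hj q hq
    match j, hq with
    | 0, hq =>
      cases hq
      simpa using fun h => hne h.symm
    | (k + 1), hq =>
      rw [pvGetElem?_cons_succ] at hq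
      have hk : k < rest.length := (List.getElem?_eq_some_iff.1 hq).1
      exact hnb k (by omega) q (by rw [List.getElem?_append_left hk]; exact hq)
  have hNoTgtRest : ∀ (batch : List (Int × Int)) (i : Nat) (v : Int), rest.length ≤ i →
      pvNoTgtBefore (rest ++ batch) i v → ∀ e ∈ rest, e.2 ≠ v := by
    intro batch i v hle hnb e he
    rcases pvMem_iff_getElem?.1 he with ⟨k, hk⟩
    have hklen : k < rest.length := (List.getElem?_eq_some_iff.1 hk).1
    exact hnb k (by omega) e (by rw [List.getElem?_append_left hklen]; exact hk)
  have hsrcrest : ∀ e ∈ rest, dist.contains e.1 = true :=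
    fun e he => (hinv.bfr e (List.mem_cons_of_mem _ he)).1
  by_cases hc : dist.contains v0 = true
  · -- ===== v0 already discovered =====
    have hd' : pvDistStep dist prev v0 = dist := by simp [pvDistStep, hc]
    rw [hd']
    simp only [pvNextF]
    have hplehead : dist.getD v0 0 ≤ dist.getD prev 0 + 1 :=
      hinv.ple (prev, v0) List.mem_cons_self hc
    have hbatchElem : ∀ {k : Nat} {p : Int × Int},
        ((fr.filter (fun f => !(dist.contains f))).map (fun f => (v0, f)))[k]? = some p →
        p.1 = v0 ∧ p.2 ∈ fr ∧ dist.contains p.2 = false := by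
      intro k p hp
      rw [List.getElem?_map] at hp
      cases h : (fr.filter (fun f => !(dist.contains f)))[k]? with
      | none => rw [h] at hp; cases hp
      | some f =>
        rw [h] at hp
        cases hp
        have hmem := List.mem_filter.1 (List.mem_of_getElem? h)
        refine ⟨rfl, hmem.1, ?_⟩
        simpa using hmem.2
    have hOldLen : ∀ p ∈ P.getD v0 [], (p.length : Int) = dist.getD v0 0 := by
      by_cases hs : v0 = s
      · subst hs
        rw [hinv.pbase]
        intro p hp
        rcases List.mem_singleton.1 hp with rfl
        rw [hinv.bst.dzero]
        rfl
      · rw [hinv.pval v0 hc hs]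
        intro p hp
        rcases List.mem_flatMap.1 hp with ⟨u, hu, hpu⟩
        rcases List.mem_map.1 hpu with ⟨q, hq, rfl⟩
        have hu2 := hinv.bst.pMem v0 u hu
        have hlen := (pvPaths_facts_mem FD FP s hfst u (hstab u hu2.1).1).2.1 q hq
        rw [(hstab u hu2.1).2] at hlen
        have := hu2.2.1
        simp only [List.length_append, List.length_cons, List.length_nil]
        push_cast
        omega
    have hOldNE : P.getD v0 [] ≠ [] := by
      by_cases hs : v0 = s
      · subst hs; rw [hinv.pbase]; simp
      · rw [hinv.pval v0 hc hs]
        apply pvFlatMap_ne_nil _ _ (hinv.bst.pNE v0 hc hs)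
        intro u hu
        simp only [ne_eq, List.map_eq_nil_iff]
        exact (pvPaths_facts_mem FD FP s hfst u (hstab u (hinv.bst.pMem v0 u hu).1).1).1
    obtain ⟨q0, oldt, holdeq⟩ : ∃ q0 t, P.getD v0 [] = q0 :: t := by
      cases h : P.getD v0 [] with
      | nil => exact absurd h hOldNE
      | cons a t => exact ⟨a, t, rfl⟩
    have hq0len : (q0.length : Int) = dist.getD v0 0 :=
      hOldLen q0 (by rw [holdeq]; exact List.mem_cons_self)
    have hNewLen : ∀ q ∈ pvPathsOf FD FP s prev, ((q ++ [v0]).length : Int)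
        = dist.getD prev 0 + 1 := by
      intro q hq
      have := (pvPaths_facts_mem FD FP s hfst prev (hstab prev hsrcprev).1).2.1 q hq
      rw [(hstab prev hsrcprev).2] at this
      simp only [List.length_append, List.length_cons, List.length_nil]
      push_cast
      omega
    have hAvalN : dist.getD v0 0 ≠ dist.getD prev 0 + 1 → pvAStep P prev v0 = P := by
      intro hgen
      simp only [pvAStep, holdeq, hPathsPrev]
      rw [List.filter_eq_nil_iff.2 ?_, List.append_nil, ← holdeq]
      · exact pvInsert_getD_self P v0 []
          (by rw [hinv.keysEq]; exact hinv.bst.nodup) (by rw [hPcont]; exact hc)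
      · intro p hp
        rcases List.mem_map.1 hp with ⟨q, hq, rfl⟩
        have hlen := hNewLen q hq
        intro hcontr
        rw [Bool.and_eq_true] at hcontr
        have hle : (q ++ [v0]).length ≤ q0.length := of_decide_eq_true hcontr.1
        have hcast : ((q ++ [v0]).length : Int) ≤ (q0.length : Int) := by exact_mod_cast hle
        rw [hlen, hq0len] at hcast
        omega
    have hAvalEg : dist.getD v0 0 = dist.getD prev 0 + 1 → prev ∈ preds.getD v0 [] →
        pvAStep P prev v0 = P := by
      intro hgen hmem
      have hs : v0 ≠ s := by
        intro he
        rw [he, hinv.bst.dzero] at hgen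
        have := hinv.bst.dpos prev hsrcprev
        omega
      simp only [pvAStep, holdeq, hPathsPrev]
      rw [List.filter_eq_nil_iff.2 ?_, List.append_nil, ← holdeq]
      · exact pvInsert_getD_self P v0 []
          (by rw [hinv.keysEq]; exact hinv.bst.nodup) (by rw [hPcont]; exact hc)
      · intro p hp
        rcases List.mem_map.1 hp with ⟨q, hq, rfl⟩
        intro hcontr
        rw [Bool.and_eq_true] at hcontr
        have h2 := hcontr.2
        have hmem2 : (q ++ [v0]) ∈ q0 :: oldt := by
          rw [← holdeq, hinv.pval v0 hc hs]
          exact List.mem_flatMap.2 ⟨prev, hmem, List.mem_map.2 ⟨q, hq, rfl⟩⟩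
        have hcc : (q0 :: oldt).contains (q ++ [v0]) = true := List.elem_eq_true_of_mem hmem2
        rw [hcc] at h2
        simp at h2
    have hAvalE : dist.getD v0 0 = dist.getD prev 0 + 1 → prev ∉ preds.getD v0 [] →
        pvAStep P prev v0 = P.insert v0 (P.getD v0 [] ++
          (pvPathsOf FD FP s prev).map (fun q => q ++ [v0])) := by
      intro hgen hmem
      have hs : v0 ≠ s := by
        intro he
        rw [he, hinv.bst.dzero] at hgen
        have := hinv.bst.dpos prev hsrcprev
        omega
      simp only [pvAStep, holdeq, hPathsPrev]
      rw [List.filter_eq_self.2 ?_, ← holdeq]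
      intro p hp
      rcases List.mem_map.1 hp with ⟨q, hq, rfl⟩
      rw [Bool.and_eq_true]
      refine ⟨decide_eq_true ?_, ?_⟩
      · have h1 := hNewLen q hq
        have : ((q ++ [v0]).length : Int) ≤ (q0.length : Int) := by
          rw [h1, hq0len, hgen]
        exact_mod_cast this
      · have hnotmem : (q ++ [v0]) ∉ q0 :: oldt := by
          intro hcontr
          rw [← holdeq, hinv.pval v0 hc hs] at hcontr
          rcases List.mem_flatMap.1 hcontr with ⟨u', hu', hqu⟩
          rcases List.mem_map.1 hqu with ⟨q', hq', heq⟩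
          have hqq : q' = q := by simpa using heq
          subst hqq
          have hu'keys := (hinv.bst.pMem v0 u' hu').1
          have : u' = prev := pvPaths_disjoint FD FP s hfst u' prev
            (hstab u' hu'keys).1 (hstab prev hsrcprev).1 q' hq' hq
          rw [this] at hu'
          exact hmem hu'
        simpa using hnotmem
    have hPstepN : (dist.getD v0 0 == dist.getD prev 0 + 1) = false →
        pvPredsStep dist preds prev v0 = preds := by
      intro hgen
      simp [pvPredsStep, hc, hgen]
    have hPstepEg : dist.getD v0 0 = dist.getD prev 0 + 1 → prev ∈ preds.getD v0 [] →
        pvPredsStep dist preds prev v0 = preds := by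
      intro hgen hmem
      simp [pvPredsStep, hc, hgen, hmem]
    have hPstepE : dist.getD v0 0 = dist.getD prev 0 + 1 → prev ∉ preds.getD v0 [] →
        pvPredsStep dist preds prev v0 = preds.insert v0 (preds.getD v0 [] ++ [prev]) := by
      intro hgen hmem
      simp only [pvPredsStep]
      rw [if_neg (by simp [hc]), if_pos]
      simp only [Bool.and_eq_true, beq_iff_eq]
      exact ⟨hgen, by simpa using hmem⟩
    have hAkeys : (pvAStep P prev v0).keys = P.keys := by
      by_cases hgen : dist.getD v0 0 = dist.getD prev 0 + 1
      · by_cases hmem : prev ∈ preds.getD v0 []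
        · rw [hAvalEg hgen hmem]
        · rw [hAvalE hgen hmem]
          exact PySem.Dict.keys_insert_of_contains P _ (by rw [hPcont]; exact hc)
      · rw [hAvalN hgen]
    have hAgetD_ne : ∀ x : Int, x ≠ v0 → (pvAStep P prev v0).getD x [] = P.getD x [] := by
      intro x hx
      by_cases hgen : dist.getD v0 0 = dist.getD prev 0 + 1
      · by_cases hmem : prev ∈ preds.getD v0 []
        · rw [hAvalEg hgen hmem]
        · rw [hAvalE hgen hmem, PySem.Dict.getD_insert, if_neg hx]
      · rw [hAvalN hgen]
    have hPgetD_ne : ∀ x : Int, x ≠ v0 →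
        (pvPredsStep dist preds prev v0).getD x [] = preds.getD x [] := by
      intro x hx
      simp only [pvPredsStep]
      rw [if_neg (by simp [hc])]
      split
      · rw [PySem.Dict.getD_insert, if_neg hx]
      · rfl
    constructor
    · have := pvBStep_state s dist preds prev v0 hinv.bst hsrcprev hhead.2
      rwa [hd'] at this
    · have := pvBStep_fr dist prev v0 fr rest hinv.bfr
      rw [hd'] at this
      simpa only [pvNextF] using this
    · rw [hAkeys, hinv.keysEq]
    · by_cases hs : v0 = s
      · subst hs
        have hgen : dist.getD v0 0 ≠ dist.getD prev 0 + 1 := by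
          rw [hinv.bst.dzero]
          have := hinv.bst.dpos prev hsrcprev
          omega
        rw [hAvalN hgen, hinv.pbase]
      · rw [hAgetD_ne s (fun h => hs h.symm), hinv.pbase]
    · intro v hv hvs
      by_cases hvv0 : v = v0
      · rw [hvv0] at hv hvs ⊢
        by_cases hgen : dist.getD v0 0 = dist.getD prev 0 + 1
        · by_cases hmem : prev ∈ preds.getD v0 []
          · rw [hAvalEg hgen hmem, hPstepEg hgen hmem]
            exact hinv.pval v0 hc hvs
          · rw [hAvalE hgen hmem, hPstepE hgen hmem, PySem.Dict.getD_insert_self,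
              PySem.Dict.getD_insert_self, List.flatMap_append, hinv.pval v0 hc hvs]
            simp
        · have hgen' : (dist.getD v0 0 == dist.getD prev 0 + 1) = false := by
            simpa using hgen
          rw [hAvalN hgen, hPstepN hgen']
          exact hinv.pval v0 hc hvs
      · rw [hAgetD_ne v hvv0, hPgetD_ne v hvv0]
        exact hinv.pval v hv hvs
    · intro e he
      rcases List.mem_append.1 he with h | h
      · exact hinv.ftgt e (List.mem_cons_of_mem _ h)
      · rcases List.mem_map.1 h with ⟨f, hf, rfl⟩
        exact ⟨fr, hget, (List.mem_filter.1 hf).1⟩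
    · intro e he h2
      rcases List.mem_append.1 he with h | h
      · exact hinv.ple e (List.mem_cons_of_mem _ h) h2
      · rcases List.mem_map.1 h with ⟨f, hf, rfl⟩
        have h3 := (List.mem_filter.1 hf).2
        simp only [Bool.not_eq_eq_eq_not, Bool.not_true] at h3
        have h2x : dist.contains f = true := h2
        rw [h3] at h2x
        cases h2x
    · intro u hu fr' hget' f hf hfc
      have := hinv.pend u hu fr' hget' f hf hfc
      rcases List.mem_cons.1 this with h4 | h4
      · exfalso
        have hfv0 : f = v0 := congrArg Prod.snd h4
        rw [hfv0, hc] at hfc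
        cases hfc
      · exact List.mem_append_left _ h4
    · intro i j hij p q hp hq hqp
      rcases hFi hp with ⟨hilt, hpr⟩ | ⟨hige, hpb⟩
      · rcases hFi hq with ⟨hjlt, hqr⟩ | ⟨hjge, hqb⟩
        · exact hinv.nio (i + 1) (j + 1) (by omega) p q (hrest2F hpr) (hrest2F hqr) hqp
        · exfalso
          obtain ⟨hq1, hq2, hq3⟩ := hbatchElem hqb
          have hsp : dist.contains p.1 = true := hsrcrest p (List.mem_of_getElem? hpr)
          rw [hqp, hsp] at hq3
          cases hq3
      · rcases hFi hq with ⟨hjlt, hqr⟩ | ⟨hjge, hqb⟩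
        · omega
        · exfalso
          obtain ⟨hp1, _, _⟩ := hbatchElem hpb
          obtain ⟨hq1, hq2, hq3⟩ := hbatchElem hqb
          rw [hqp, hp1, hc] at hq3
          cases hq3
    · intro i u v hp hvc hnb x hx
      rcases hFi hp with ⟨hilt, hpr⟩ | ⟨hige, hpb⟩
      · have hvv0 : v ≠ v0 := by
          intro he2; rw [he2, hc] at hvc; cases hvc
        exact hinv.first16 (i + 1) u v (hrest2F hpr) hvc (hNoTgt2F _ i v hvv0 hnb) x hx
      · exfalso
        obtain ⟨hp1, hp2, _⟩ := hbatchElem hpb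
        have hp2' : v ∈ fr := hp2
        have := hinv.pend v0 hc fr hget v hp2' hvc
        rcases List.mem_cons.1 this with h4 | h4
        · have : v = v0 := congrArg Prod.snd h4
          rw [this, hc] at hvc; cases hvc
        · exact hNoTgtRest _ i v hige hnb (v0, v) h4 rfl
    · intro i u v hp hvc hnb e he hev
      have hvv0 : v ≠ v0 := by
        intro he2; rw [he2, hc] at hvc; cases hvc
      rcases hFi hp with ⟨hilt, hpr⟩ | ⟨hige, hpb⟩
      · rcases List.mem_append.1 he with h | h
        · exact hinv.firstSame (i + 1) u v (hrest2F hpr) hvc (hNoTgt2F _ i v hvv0 hnb) e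
            (List.mem_cons_of_mem _ h) hev
        · rcases List.mem_map.1 h with ⟨f, hf, rfl⟩
          have hfv : f = v := hev
          rcases hinv.firstKey (i + 1) u v (hrest2F hpr) hvc (hNoTgt2F _ i v hvv0 hnb)
            v0 hc fr hget (by rw [← hfv]; exact (List.mem_filter.1 hf).1) with h4 | h4
          · rw [h4]
          · exact pvBefore_rel hinv.mono h4
      · exfalso
        obtain ⟨hp1, hp2, _⟩ := hbatchElem hpb
        have hp2' : v ∈ fr := hp2
        have := hinv.pend v0 hc fr hget v hp2' hvc
        rcases List.mem_cons.1 this with h4 | h4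
        · have : v = v0 := congrArg Prod.snd h4
          exact hvv0 this
        · exact hNoTgtRest _ i v hige hnb (v0, v) h4 rfl
    · intro i u v hp hvc hnb w hw frw hgetw hvfrw
      have hvv0 : v ≠ v0 := by
        intro he2; rw [he2, hc] at hvc; cases hvc
      rcases hFi hp with ⟨hilt, hpr⟩ | ⟨hige, hpb⟩
      · exact hinv.firstKey (i + 1) u v (hrest2F hpr) hvc (hNoTgt2F _ i v hvv0 hnb)
          w hw frw hgetw hvfrw
      · exfalso
        obtain ⟨hp1, hp2, _⟩ := hbatchElem hpb
        have hp2' : v ∈ fr := hp2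
        have := hinv.pend v0 hc fr hget v hp2' hvc
        rcases List.mem_cons.1 this with h4 | h4
        · exact hvv0 (congrArg Prod.snd h4)
        · exact hNoTgtRest _ i v hige hnb (v0, v) h4 rfl
    · intro i j u v u' v' hij hp hq hvc hvc' hnb hnb'
      have hvv0 : v ≠ v0 := by
        intro he2; rw [he2, hc] at hvc; cases hvc
      have hvv0' : v' ≠ v0 := by
        intro he2; rw [he2, hc] at hvc'; cases hvc'
      rcases hFi hp with ⟨hilt, hpr⟩ | ⟨hige, hpb⟩
      · rcases hFi hq with ⟨hjlt, hqr⟩ | ⟨hjge, hqb⟩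
        · exact hinv.firstOrd (i + 1) (j + 1) u v u' v' (by omega) (hrest2F hpr)
            (hrest2F hqr) hvc hvc' (hNoTgt2F _ i v hvv0 hnb) (hNoTgt2F _ j v' hvv0' hnb')
        · exfalso
          obtain ⟨hq1, hq2, _⟩ := hbatchElem hqb
          have hq2x : v' ∈ fr := hq2
          have := hinv.pend v0 hc fr hget v' hq2x hvc'
          rcases List.mem_cons.1 this with h4 | h4
          · exact hvv0' (congrArg Prod.snd h4)
          · exact hNoTgtRest _ j v' hjge hnb' (v0, v') h4 rfl
      · rcases hFi hq with ⟨hjlt, hqr⟩ | ⟨hjge, hqb⟩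
        · omega
        · obtain ⟨hp1, _, _⟩ := hbatchElem hpb
          obtain ⟨hq1, _, _⟩ := hbatchElem hqb
          have hp1x : u = v0 := hp1
          have hq1x : u' = v0 := hq1
          rw [hp1x, hq1x]
    · exact hinv.mono
  · -- ===== discovery of v0 =====
    rw [Bool.not_eq_true] at hc
    have hd' : pvDistStep dist prev v0 = dist.insert v0 (dist.getD prev 0 + 1) := by
      simp [pvDistStep, hc]
    have hp' : pvPredsStep dist preds prev v0 = preds.insert v0 [prev] := by
      simp [pvPredsStep, hc]
    have hkeys' : (dist.insert v0 (dist.getD prev 0 + 1)).keys = dist.keys ++ [v0] :=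
      pvKeys_append_of_not_contains dist v0 _ hc
    have hnev0 : ∀ x : Int, dist.contains x = true → x ≠ v0 := by
      intro x hx he; rw [he, hc] at hx; cases hx
    have hgd' : ∀ x : Int, x ≠ v0 →
        (dist.insert v0 (dist.getD prev 0 + 1)).getD x 0 = dist.getD x 0 := by
      intro x hx
      rw [PySem.Dict.getD_insert, if_neg hx]
    have hgdv0 : (dist.insert v0 (dist.getD prev 0 + 1)).getD v0 0 = dist.getD prev 0 + 1 :=
      PySem.Dict.getD_insert_self _ _ _ _
    have hcont' : ∀ x : Int, (dist.insert v0 (dist.getD prev 0 + 1)).contains x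
        = (x == v0 || dist.contains x) := fun x => PySem.Dict.contains_insert _ _ _ _
    have hPold : P.getD v0 [] = [] := by
      apply PySem.Dict.getD_of_not_contains
      rw [hPcont]; exact hc
    have hAv : pvAStep P prev v0
        = P.insert v0 ((pvPathsOf FD FP s prev).map (fun p => p ++ [v0])) := by
      simp only [pvAStep, hPold, hPathsPrev]
      congr 1
      rw [List.nil_append]
      apply List.filter_eq_self.2
      intro p _
      simp
    have hfirsthead : pvNoTgtBefore ((prev, v0) :: rest) 0 v0 := by
      intro j hj q hq
      omega
    have h16 := hinv.first16 0 prev v0 rfl hc hfirsthead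
    have hbatchElem : ∀ {k : Nat} {p : Int × Int},
        ((fr.filter (fun f => !((dist.insert v0 (dist.getD prev 0 + 1)).contains f))).map
          (fun f => (v0, f)))[k]? = some p →
        p.1 = v0 ∧ p.2 ∈ fr ∧ (dist.insert v0 (dist.getD prev 0 + 1)).contains p.2 = false := by
      intro k p hp
      rw [List.getElem?_map] at hp
      cases h : (fr.filter (fun f => !((dist.insert v0 (dist.getD prev 0 + 1)).contains f)))[k]? with
      | none => rw [h] at hp; cases hp
      | some f =>
        rw [h] at hp
        cases hp
        have hmem := List.mem_filter.1 (List.mem_of_getElem? h)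
        refine ⟨rfl, hmem.1, ?_⟩
        simpa using hmem.2
    rw [hd', hp']
    simp only [pvNextF, hd']
    constructor
    · have := pvBStep_state s dist preds prev v0 hinv.bst hsrcprev hhead.2
      rwa [hd', hp'] at this
    · have := pvBStep_fr dist prev v0 fr rest hinv.bfr
      rwa [hd'] at this
    · rw [hAv, hkeys', ← hinv.keysEq]
      rw [PySem.Dict.keys_insert_of_not_contains (h := by rw [hPcont]; exact hc)]
    · rw [hAv, PySem.Dict.getD_insert,
        if_neg (hnev0 s hinv.bst.scont), hinv.pbase]
    · intro v hv hvs
      rw [hcont'] at hv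
      rcases Bool.or_eq_true_iff.1 hv with h | h
      · rw [beq_iff_eq] at h
        subst h
        rw [hAv, PySem.Dict.getD_insert_self, PySem.Dict.getD_insert_self]
        simp
      · have hne : v ≠ v0 := hnev0 v h
        rw [hAv, PySem.Dict.getD_insert, if_neg hne, PySem.Dict.getD_insert, if_neg hne]
        exact hinv.pval v h hvs
    · intro e he
      rcases List.mem_append.1 he with h | h
      · exact hinv.ftgt e (List.mem_cons_of_mem _ h)
      · rcases List.mem_map.1 h with ⟨f, hf, rfl⟩
        exact ⟨fr, hget, (List.mem_filter.1 hf).1⟩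
    · intro e he h2
      rcases List.mem_append.1 he with h | h
      · have hsrc1 : dist.contains e.1 = true := hsrcrest e h
        rw [hcont'] at h2
        rcases Bool.or_eq_true_iff.1 h2 with h3 | h3
        · rw [beq_iff_eq] at h3
          rw [h3, hgdv0, hgd' e.1 (hnev0 e.1 hsrc1)]
          have := hinv.firstSame 0 prev v0 rfl hc hfirsthead e (List.mem_cons_of_mem _ h) h3
          omega
        · rw [hgd' e.2 (hnev0 e.2 h3), hgd' e.1 (hnev0 e.1 hsrc1)]
          exact hinv.ple e (List.mem_cons_of_mem _ h) h3
      · rcases List.mem_map.1 h with ⟨f, hf, rfl⟩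
        have h3 := (List.mem_filter.1 hf).2
        simp only [Bool.not_eq_eq_eq_not, Bool.not_true] at h3
        have h2x : (dist.insert v0 (dist.getD prev 0 + 1)).contains f = true := h2
        rw [h3] at h2x
        cases h2x
    · intro u hu fr' hget' f hf hfc
      rw [hcont'] at hu
      rcases Bool.or_eq_true_iff.1 hu with h | h
      · rw [beq_iff_eq] at h
        subst h
        rw [hget] at hget'
        cases hget'
        apply List.mem_append_right
        apply List.mem_map.2
        refine ⟨f, List.mem_filter.2 ⟨hf, ?_⟩, rfl⟩
        simpa using hfc
      · have hfold : dist.contains f = false := by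
          rw [hcont'] at hfc
          exact (Bool.or_eq_false_iff.1 hfc).2
        have := hinv.pend u h fr' hget' f hf hfold
        rcases List.mem_cons.1 this with h4 | h4
        · exfalso
          have hfv0 : f = v0 := congrArg Prod.snd h4
          rw [hfv0, hcont'] at hfc
          simp at hfc
        · exact List.mem_append_left _ h4
    · intro i j hij p q hp hq hqp
      rcases hFi hp with ⟨hilt, hpr⟩ | ⟨hige, hpb⟩
      · rcases hFi hq with ⟨hjlt, hqr⟩ | ⟨hjge, hqb⟩
        · have hsp : dist.contains p.1 = true := hsrcrest p (List.mem_of_getElem? hpr)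
          have hsq : dist.contains q.1 = true := hsrcrest q (List.mem_of_getElem? hqr)
          rw [hgd' q.1 (hnev0 q.1 hsq), hgd' p.1 (hnev0 p.1 hsp)]
          exact hinv.nio (i + 1) (j + 1) (by omega) p q (hrest2F hpr) (hrest2F hqr) hqp
        · exfalso
          obtain ⟨hq1, hq2, hq3⟩ := hbatchElem hqb
          have hsp : dist.contains p.1 = true := hsrcrest p (List.mem_of_getElem? hpr)
          rw [hqp] at hq3
          rw [hcont' p.1, hsp] at hq3
          simp at hq3
      · rcases hFi hq with ⟨hjlt, hqr⟩ | ⟨hjge, hqb⟩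
        · omega
        · exfalso
          obtain ⟨hp1, _, _⟩ := hbatchElem hpb
          obtain ⟨hq1, hq2, hq3⟩ := hbatchElem hqb
          rw [hqp, hp1, hcont' v0] at hq3
          simp at hq3
    · intro i u v hp hvc hnb x hx
      have hvv0 : v ≠ v0 := by
        intro he
        rw [he, hcont' v0] at hvc
        simp at hvc
      have hvold : dist.contains v = false := by
        rw [hcont'] at hvc
        exact (Bool.or_eq_false_iff.1 hvc).2
      rcases hFi hp with ⟨hilt, hpr⟩ | ⟨hige, hpb⟩
      · have hF1 := hrest2F hpr
        have hnbF := hNoTgt2F _ i v hvv0 hnb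
        have hsrcu : dist.contains u = true := hsrcrest (u, v) (List.mem_of_getElem? hpr)
        have h16' := hinv.first16 (i + 1) u v hF1 hvold hnbF
        rw [hcont'] at hx
        rcases Bool.or_eq_true_iff.1 hx with h | h
        · rw [beq_iff_eq] at h
          rw [h, hgdv0, hgd' u (hnev0 u hsrcu)]
          have := hinv.firstOrd 0 (i + 1) prev v0 u v (by omega) rfl hF1 hc hvold
            hfirsthead hnbF
          omega
        · rw [hgd' x (hnev0 x h), hgd' u (hnev0 u hsrcu)]
          exact h16' x h
      · obtain ⟨hp1, _, _⟩ := hbatchElem hpb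
        have hp1x : u = v0 := hp1
        rw [hp1x, hgdv0]
        rw [hcont'] at hx
        rcases Bool.or_eq_true_iff.1 hx with h | h
        · rw [beq_iff_eq] at h
          subst h
          rw [hgdv0]
          omega
        · rw [hgd' x (hnev0 x h)]
          have := h16 x h
          omega
    · intro i u v hp hvc hnb e he hev
      have hvv0 : v ≠ v0 := by
        intro he2
        rw [he2, hcont' v0] at hvc
        simp at hvc
      have hvold : dist.contains v = false := by
        rw [hcont'] at hvc
        exact (Bool.or_eq_false_iff.1 hvc).2
      rcases hFi hp with ⟨hilt, hpr⟩ | ⟨hige, hpb⟩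
      · have hF1 := hrest2F hpr
        have hnbF := hNoTgt2F _ i v hvv0 hnb
        have hsrcu : dist.contains u = true := hsrcrest (u, v) (List.mem_of_getElem? hpr)
        rcases List.mem_append.1 he with h | h
        · have hsrce : dist.contains e.1 = true := hsrcrest e h
          rw [hgd' u (hnev0 u hsrcu), hgd' e.1 (hnev0 e.1 hsrce)]
          exact hinv.firstSame (i + 1) u v hF1 hvold hnbF e (List.mem_cons_of_mem _ h) hev
        · rcases List.mem_map.1 h with ⟨f, hf, rfl⟩
          have hgoal : (dist.insert v0 (dist.getD prev 0 + 1)).getD ((v0, f).1) 0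
              = dist.getD prev 0 + 1 := hgdv0
          rw [hgoal, hgd' u (hnev0 u hsrcu)]
          have := h16 u hsrcu
          omega
      · obtain ⟨hp1, _, _⟩ := hbatchElem hpb
        rcases List.mem_append.1 he with h | h
        · exfalso
          exact hNoTgtRest _ i v hige hnb e h hev
        · rcases List.mem_map.1 h with ⟨f, hf, rfl⟩
          have hp1x : u = v0 := hp1
          have hgoal1 : (dist.insert v0 (dist.getD prev 0 + 1)).getD ((v0, f).1) 0
              = dist.getD prev 0 + 1 := hgdv0
          rw [hp1x, hgoal1]
    · intro i u v hp hvc hnb w hw frw hgetw hvfrw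
      have hvv0 : v ≠ v0 := by
        intro he2
        rw [he2, hcont' v0] at hvc
        simp at hvc
      have hvold : dist.contains v = false := by
        rw [hcont'] at hvc
        exact (Bool.or_eq_false_iff.1 hvc).2
      rcases hFi hp with ⟨hilt, hpr⟩ | ⟨hige, hpb⟩
      · have hF1 := hrest2F hpr
        have hnbF := hNoTgt2F _ i v hvv0 hnb
        have hsrcu : dist.contains u = true := hsrcrest (u, v) (List.mem_of_getElem? hpr)
        rw [hcont'] at hw
        rcases Bool.or_eq_true_iff.1 hw with h | h
        · rw [beq_iff_eq] at h
          subst h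
          right
          rw [hkeys']
          apply pvBefore_append_last
          rw [← PySem.Dict.contains_iff_mem_keys]
          exact hsrcu
        · rcases hinv.firstKey (i + 1) u v hF1 hvold hnbF w h frw hgetw hvfrw with h4 | h4
          · exact Or.inl h4
          · right
            rw [hkeys']
            exact pvBefore_append _ _ _ _ h4
      · obtain ⟨hp1, _, _⟩ := hbatchElem hpb
        rw [hcont'] at hw
        rcases Bool.or_eq_true_iff.1 hw with h | h
        · rw [beq_iff_eq] at h
          subst h
          exact Or.inl hp1
        · exfalso
          have := hinv.pend w h frw hgetw v hvfrw hvold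
          rcases List.mem_cons.1 this with h4 | h4
          · exact hvv0 (congrArg Prod.snd h4)
          · exact hNoTgtRest _ i v hige hnb (w, v) h4 rfl
    · intro i j u v u' v' hij hp hq hvc hvc' hnb hnb'
      have hvv0 : v ≠ v0 := by
        intro he2
        rw [he2, hcont' v0] at hvc
        simp at hvc
      have hvv0' : v' ≠ v0 := by
        intro he2
        rw [he2, hcont' v0] at hvc'
        simp at hvc'
      have hvold : dist.contains v = false := by
        rw [hcont'] at hvc
        exact (Bool.or_eq_false_iff.1 hvc).2
      have hvold' : dist.contains v' = false := by
        rw [hcont'] at hvc'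
        exact (Bool.or_eq_false_iff.1 hvc').2
      rcases hFi hp with ⟨hilt, hpr⟩ | ⟨hige, hpb⟩
      · have hF1 := hrest2F hpr
        have hnbF := hNoTgt2F _ i v hvv0 hnb
        have hsrcu : dist.contains u = true := hsrcrest (u, v) (List.mem_of_getElem? hpr)
        rcases hFi hq with ⟨hjlt, hqr⟩ | ⟨hjge, hqb⟩
        · have hF2 := hrest2F hqr
          have hnbF' := hNoTgt2F _ j v' hvv0' hnb'
          have hsrcu' : dist.contains u' = true := hsrcrest (u', v') (List.mem_of_getElem? hqr)
          rw [hgd' u (hnev0 u hsrcu), hgd' u' (hnev0 u' hsrcu')]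
          exact hinv.firstOrd (i + 1) (j + 1) u v u' v' (by omega) hF1 hF2 hvold hvold'
            hnbF hnbF'
        · obtain ⟨hq1, _, _⟩ := hbatchElem hqb
          have hq1x : u' = v0 := hq1
          rw [hq1x, hgdv0, hgd' u (hnev0 u hsrcu)]
          have := h16 u hsrcu
          omega
      · rcases hFi hq with ⟨hjlt, hqr⟩ | ⟨hjge, hqb⟩
        · omega
        · obtain ⟨hp1, _, _⟩ := hbatchElem hpb
          obtain ⟨hq1, _, _⟩ := hbatchElem hqb
          have hp1x : u = v0 := hp1
          have hq1x : u' = v0 := hq1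
          rw [hp1x, hq1x]
    · rw [hkeys']
      rw [List.pairwise_append]
      refine ⟨?_, List.pairwise_singleton _ _, ?_⟩
      · apply List.Pairwise.imp_of_mem ?_ hinv.mono
        intro a b ha hb hab
        rw [hgd' a (hnev0 a (by rwa [PySem.Dict.contains_iff_mem_keys])),
          hgd' b (hnev0 b (by rwa [PySem.Dict.contains_iff_mem_keys]))]
        exact hab
      · intro a ha b hb
        rcases List.mem_singleton.1 hb with rfl
        have hac : dist.contains a = true := by rwa [PySem.Dict.contains_iff_mem_keys]
        rw [hgd' a (hnev0 a hac), hgdv0]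
        have := h16 a hac
        omega

theorem pvMain (g : PySem.Dict Int (List Int)) (V : List Int) (hg)
    (R : List Int) (hRsome : ∀ x ∈ R, (g.get? x).isSome = true)
    (hRcl : ∀ x ∈ R, ∀ fr, g.get? x = some fr → ∀ f ∈ fr, f ∈ R) (s : Int)
    (P : PySem.Dict Int (List (List Int))) (dist : PySem.Dict Int Int)
    (preds : PySem.Dict Int (List Int)) (F : List (Int × Int)) (hF)
    (hFR : ∀ e ∈ F, e.2 ∈ R)
    (FD : PySem.Dict Int Int) (FP : PySem.Dict Int (List Int))
    (hfin : pvBloop g V dist preds F hg hF = (FD, FP))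
    (hinv : pvJInv g s FD FP P dist preds F) :
    pvAloop g V P F hg hF = pvRecon FP s (FD.keys.drop 1) := by
  match F, hF with
  | [], hF =>
    rw [pvAloop_nil]
    rw [pvBloop_nil] at hfin
    have hdist : dist = FD := congrArg Prod.fst hfin
    have hpreds : preds = FP := congrArg Prod.snd hfin
    subst hdist hpreds
    have hkeys : dist.keys = s :: dist.keys.drop 1 := pvHead?_eq_cons hinv.bst.head
    have hnds : (s :: dist.keys.drop 1).Nodup := by rw [← hkeys]; exact hinv.bst.nodup
    apply PySem.Dict.ext
    rw [PySem.Dict.items_eq_map_keys P (by rw [hinv.keysEq]; exact hinv.bst.nodup) [],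
      PySem.Dict.items_eq_map_keys (pvRecon preds s (dist.keys.drop 1))
        (by rw [pvRecon_keys _ _ _ hnds]; exact hnds) []]
    rw [hinv.keysEq, pvRecon_keys _ _ _ hnds, ← hkeys]
    apply List.map_congr_left
    intro k hk
    have hkc : dist.contains k = true := by rwa [PySem.Dict.contains_iff_mem_keys]
    by_cases hks : k = s
    · subst hks
      rw [hinv.pbase]
      rw [show (pvRecon preds k (dist.keys.drop 1)).getD k [] = [[]] from
        pvRecon_getD_s preds k _ (List.nodup_cons.1 hnds).1]
    · rw [hinv.pval k hkc hks]
      rw [pvRecon_getD_mem preds s (dist.keys.drop 1) hnds k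
        (by
          have := hk
          rw [hkeys] at this
          rcases List.mem_cons.1 this with h | h
          · exact absurd h hks
          · exact h)
        (by
          intro u hu
          have := (hinv.bst.pMem k u hu).2.2
          rwa [hkeys] at this)]
      rfl
  | (prev, v0) :: rest, hF =>
    have hv0V : v0 ∈ V := hF (prev, v0) List.mem_cons_self
    obtain ⟨fr, hget⟩ : ∃ fr, g.get? v0 = some fr := by
      have := hRsome v0 (hFR (prev, v0) List.mem_cons_self)
      cases h : g.get? v0 with
      | none => rw [h] at this; cases this
      | some fr => exact ⟨fr, rfl⟩
    have hstab : ∀ x, dist.contains x = true →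
        FD.contains x = true ∧ FD.getD x 0 = dist.getD x 0 := by
      intro x hx
      have := pvBloop_dist_stable g V hg dist preds _ hF x hx
      rw [hfin] at this
      exact this
    have hfst : pvBState s FD FP := by
      have := pvBloop_final_state g V hg s dist preds _ hF hinv.bst hinv.bfr
      rw [hfin] at this
      exact this
    have hacct : ∀ v, dist.contains v = true →
        FP.getD v [] = (pvGenSrcs dist v ((prev, v0) :: rest)).foldl pvAddNew
          (preds.getD v []) := by
      intro v hv
      have := pvBloop_acct g V hg R hRsome hRcl dist preds _ hF hFR
        (fun e he => (hinv.bfr e he).1) v hv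
      rw [hfin] at this
      exact this
    have hstep := pvJInv_step g s FD FP P dist preds prev v0 rest fr hget hinv hfst hstab hacct
    have hFB' : ∀ e ∈ pvNextF (pvDistStep dist prev v0) v0 fr rest, e.2 ∈ V :=
      pvNextHF _ _ _ hg (fun e he => hF e (List.mem_cons_of_mem _ he)) hget
    have hFR' : ∀ e ∈ pvNextF (pvDistStep dist prev v0) v0 fr rest, e.2 ∈ R := by
      intro e he
      rcases List.mem_append.1 he with h | h
      · exact hFR e (List.mem_cons_of_mem _ h)
      · rcases List.mem_map.1 h with ⟨f, hf, rfl⟩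
        exact hRcl v0 (hFR (prev, v0) List.mem_cons_self) fr hget f (List.mem_filter.1 hf).1
    have hfront : pvNextFA (pvAStep P prev v0) v0 fr rest
        = pvNextF (pvDistStep dist prev v0) v0 fr rest := by
      simp only [pvNextFA, pvNextF]
      congr 1
      congr 1
      apply List.filter_congr
      intro f _
      rw [PySem.Dict.contains_eq_decide_mem_keys, PySem.Dict.contains_eq_decide_mem_keys,
        hstep.keysEq]
    rw [pvAloop_cons' g V P prev v0 rest (pvNextF (pvDistStep dist prev v0) v0 fr rest)
      fr hget hfront hg hF hFB']
    rw [pvBloop_cons g V dist preds prev v0 rest fr hget hg hF hFB'] at hfin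
    exact pvMain g V hg R hRsome hRcl s (pvAStep P prev v0) (pvDistStep dist prev v0)
      (pvPredsStep dist preds prev v0) (pvNextF (pvDistStep dist prev v0) v0 fr rest) hFB'
      hFR' FD FP hfin hstep
  termination_by (V.countP (fun x => !(dist.contains x)), F.countP (fun e => dist.contains e.2))
  decreasing_by
    exact pvMeasure_decStep V dist prev v0 fr rest (hF (prev, v0) List.mem_cons_self)

theorem pvInitJInv (g : PySem.Dict Int (List Int)) (s : Int) (fr : List Int)
    (hget : g.get? s = some fr) (FD : PySem.Dict Int Int) (FP : PySem.Dict Int (List Int)) :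
    pvJInv g s FD FP ((PySem.Dict.empty).insert s [[]]) ((PySem.Dict.empty).insert s 0)
      PySem.Dict.empty (fr.map (fun f => (s, f))) := by
  set dist0 : PySem.Dict Int Int := (PySem.Dict.empty).insert s 0 with hd0
  have hcont : ∀ v : Int, dist0.contains v = (v == s) := by
    intro v
    rw [hd0, PySem.Dict.contains_insert, PySem.Dict.contains_empty, Bool.or_false]
  have hkeys : dist0.keys = [s] := by
    rw [hd0, PySem.Dict.keys_insert_of_not_contains (h := PySem.Dict.contains_empty _)]
    rfl
  have hgetd : ∀ v : Int, dist0.getD v 0 = 0 := by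
    intro v
    rw [hd0, PySem.Dict.getD_insert]
    split <;> [rfl; rw [PySem.Dict.getD_empty]]
  have hsrc : ∀ {p : Int × Int} {i : Nat}, (fr.map (fun f => (s, f)))[i]? = some p → p.1 = s := by
    intro p i hp
    rw [List.getElem?_map] at hp
    cases h : fr[i]? with
    | none => rw [h] at hp; cases hp
    | some f => rw [h] at hp; cases hp; rfl
  have hmem : ∀ e ∈ (fr.map (fun f => (s, f))), e.1 = s ∧ e.2 ∈ fr := by
    intro e he
    rcases List.mem_map.1 he with ⟨f, hf, rfl⟩
    exact ⟨rfl, hf⟩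
  constructor
  · constructor
    · rw [hkeys]; exact List.nodup_singleton _
    · rw [hkeys]; rfl
    · rw [hcont]; simp
    · rw [hgetd]
    · intro v _; rw [hgetd]
    · intro v hv; rw [PySem.Dict.contains_empty] at hv; cases hv
    · intro v hv hvs
      rw [hcont, beq_iff_eq] at hv
      exact absurd hv hvs
    · intro v u hu
      rw [PySem.Dict.getD_empty] at hu
      cases hu
    · intro v; rw [PySem.Dict.getD_empty]; exact List.nodup_nil
  · intro e he
    obtain ⟨h1, _⟩ := hmem e he
    refine ⟨by rw [hcont, h1]; simp, ?_⟩
    intro _ hcompat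
    rw [h1, hgetd, hgetd] at hcompat
    omega
  · rw [hkeys, PySem.Dict.keys_insert_of_not_contains (h := PySem.Dict.contains_empty _)]
    rfl
  · rw [PySem.Dict.getD_insert_self]
  · intro v hv hvs
    rw [hcont, beq_iff_eq] at hv
    exact absurd hv hvs
  · intro e he
    obtain ⟨h1, h2⟩ := hmem e he
    exact ⟨fr, by rw [h1]; exact hget, h2⟩
  · intro e he h2
    rw [hgetd, hgetd]
    omega
  · intro u hu fr' hget' f hf hfc
    rw [hcont, beq_iff_eq] at hu
    subst hu
    rw [hget] at hget'
    cases hget'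
    exact List.mem_map.2 ⟨f, hf, rfl⟩
  · intro i j hij p q hp hq hqp
    rw [hgetd, hgetd]
    omega
  · intro i u v hp _ _ x hx
    rw [hgetd, hgetd]
    omega
  · intro i u v hp _ _ e he h2
    rw [hgetd, hgetd]
  · intro i u v hp _ _ w hw frw _ _
    left
    have h1 : u = s := hsrc hp
    rw [hcont, beq_iff_eq] at hw
    rw [h1, hw]
  · intro i j u v u' v' hij hp hq _ _ _ _
    rw [hgetd, hgetd]
  · rw [hkeys]
    exact List.pairwise_singleton _ _

theorem pvTopA (fuid : Int) (friendships : List (Int × List Int)) (fr : List Int)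
    (hfr : (PySem.Dict.mk friendships).get? fuid = some fr) (hg') (hF') :
    shortest_paths_from fuid friendships =
      (pvAloop (PySem.Dict.mk friendships) (pvTargets friendships)
        ((PySem.Dict.empty).insert fuid [[]]) (fr.map (fun f => (fuid, f))) hg' hF').items := by
  unfold shortest_paths_from
  dsimp only
  split
  · next h => rw [hfr] at h; cases h
  · next fr' h => rw [hfr] at h; cases h; rfl

-- ---------- coupling B's worklist BFS with the reference loop ----------

theorem pvBfs_nil (g : PySem.Dict Int (List Int)) (info : PySem.Dict Int (Int × List Int))
    (pending : List Int) : pvBfs g info pending [] = info := by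
  rw [pvBfs]

theorem pvBfs_cons (g : PySem.Dict Int (List Int)) (info : PySem.Dict Int (Int × List Int))
    (pending : List Int) (u v : Int) (rest : List (Int × Int)) (fr : List Int)
    (hget : g.get? v = some fr) :
    pvBfs g info pending ((u, v) :: rest) =
      pvBfs g (pvIStep info pending u v) (pending.erase v)
        (rest ++ (fr.filter (pending.erase v).contains).map (fun f => (v, f))) := by
  rw [pvBfs]
  split
  · next heq => rw [hget] at heq; cases heq
  · next fr' heq => rw [hget] at heq; cases heq; rfl

theorem pvBfs_cons_none (g : PySem.Dict Int (List Int)) (info : PySem.Dict Int (Int × List Int))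
    (pending : List Int) (u v : Int) (rest : List (Int × Int)) (hget : g.get? v = none) :
    pvBfs g info pending ((u, v) :: rest) = pvIStep info pending u v := by
  rw [pvBfs]
  split
  · rfl
  · next fr' heq => rw [hget] at heq; cases heq

-- the coupling relation: info fuses (dist, preds) and agrees on key order
def pvRel (info : PySem.Dict Int (Int × List Int)) (dist : PySem.Dict Int Int)
    (preds : PySem.Dict Int (List Int)) : Prop :=
  info.keys = dist.keys ∧
  ∀ x : Int, info.get? x =
    (if dist.contains x = true then some (dist.getD x 0, preds.getD x []) else none)

theorem pvRel_fst (info : PySem.Dict Int (Int × List Int)) (dist : PySem.Dict Int Int)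
    (preds : PySem.Dict Int (List Int)) (h : pvRel info dist preds) (u : Int) :
    (info.getD u (0, [])).1 = dist.getD u 0 := by
  rw [PySem.Dict.getD_eq_get?_getD, h.2 u]
  by_cases hu : dist.contains u = true
  · simp [hu]
  · rw [Bool.not_eq_true] at hu
    rw [PySem.Dict.getD_of_not_contains (d := dist) (k := u) (d0 := 0) hu]
    simp [hu]

theorem pvRel_contains (info : PySem.Dict Int (Int × List Int)) (dist : PySem.Dict Int Int)
    (preds : PySem.Dict Int (List Int)) (h : pvRel info dist preds) (x : Int) :
    info.contains x = dist.contains x := by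
  rw [PySem.Dict.contains_eq_isSome_get?, h.2 x]
  by_cases hx : dist.contains x = true <;> simp [hx]

theorem pvPend_contains (U : List Int) (dist : PySem.Dict Int Int) (v : Int) (hv : v ∈ U) :
    (U.filter (fun x => !(dist.contains x))).contains v = !(dist.contains v) := by
  by_cases hc : dist.contains v = true
  · simp [List.mem_filter, hc]
  · rw [Bool.not_eq_true] at hc
    simp [List.mem_filter, hv, hc]

theorem pvPend_erase (U : List Int) (hU : U.Nodup) (dist : PySem.Dict Int Int) (v : Int)
    (w : Int) :
    (U.filter (fun x => !(dist.contains x))).erase v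
      = U.filter (fun x => !((dist.insert v w).contains x)) := by
  rw [List.Nodup.erase_eq_filter (List.Nodup.filter _ hU), List.filter_filter]
  apply List.filter_congr
  intro x _
  rw [PySem.Dict.contains_insert]
  cases h1 : (x == v) <;> cases h2 : dist.contains x <;> simp_all

theorem pvRelStep (U : List Int) (hU : U.Nodup) (info : PySem.Dict Int (Int × List Int))
    (dist : PySem.Dict Int Int) (preds : PySem.Dict Int (List Int)) (u v : Int)
    (hrel : pvRel info dist preds) (hvU : v ∈ U) :
    pvRel (pvIStep info (U.filter (fun x => !(dist.contains x))) u v)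
      (pvDistStep dist u v) (pvPredsStep dist preds u v)
    ∧ (U.filter (fun x => !(dist.contains x))).erase v
        = U.filter (fun x => !((pvDistStep dist u v).contains x)) := by
  have hpc := pvPend_contains U dist v hvU
  have hfst := pvRel_fst info dist preds hrel u
  by_cases hc : dist.contains v = true
  · -- v already discovered
    have hpcf : (U.filter (fun x => !(dist.contains x))).contains v = false := by
      rw [hpc, hc]; rfl
    have hvnot : v ∉ U.filter (fun x => !(dist.contains x)) := by
      simp [List.mem_filter, hc]
    have hdd : pvDistStep dist u v = dist := by simp [pvDistStep, hc]
    have hgetv : info.get? v = some (dist.getD v 0, preds.getD v []) := by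
      rw [hrel.2 v, if_pos hc]
    have hstep : pvIStep info (U.filter (fun x => !(dist.contains x))) u v =
        (if (dist.getD v 0 == dist.getD u 0 + 1 && !((preds.getD v []).contains u))
         then info.insert v (dist.getD v 0, preds.getD v [] ++ [u]) else info) := by
      simp only [pvIStep, hpcf, Bool.false_eq_true, if_false, hgetv, hfst]
    refine ⟨?_, by rw [List.erase_of_not_mem hvnot, hdd]⟩
    rw [hstep, hdd]
    by_cases hcond : (dist.getD v 0 == dist.getD u 0 + 1 && !((preds.getD v []).contains u)) = true
    · rw [if_pos hcond]
      have hpp : pvPredsStep dist preds u v = preds.insert v (preds.getD v [] ++ [u]) := by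
        simp only [pvPredsStep]
        rw [if_neg (by simp [hc]), if_pos hcond]
      rw [hpp]
      constructor
      · rw [PySem.Dict.keys_insert_of_contains info _
          (by rw [pvRel_contains info dist preds hrel]; exact hc)]
        exact hrel.1
      · intro x
        by_cases hx : x = v
        · subst hx
          rw [PySem.Dict.get?_insert_self, if_pos hc, PySem.Dict.getD_insert_self]
        · rw [PySem.Dict.get?_insert_of_ne (hne := hx), hrel.2 x,
            PySem.Dict.getD_insert, if_neg hx]
    · rw [if_neg hcond]
      have hpp : pvPredsStep dist preds u v = preds := by
        simp only [pvPredsStep]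
        rw [if_neg (by simp [hc]), if_neg hcond]
      rw [hpp]
      exact hrel
  · -- discovery of v
    rw [Bool.not_eq_true] at hc
    have hicf : info.contains v = false := by
      rw [pvRel_contains info dist preds hrel]; exact hc
    have hpct : (U.filter (fun x => !(dist.contains x))).contains v = true := by
      rw [hpc, hc]; rfl
    have hdd : pvDistStep dist u v = dist.insert v (dist.getD u 0 + 1) := by
      simp [pvDistStep, hc]
    have hpp : pvPredsStep dist preds u v = preds.insert v [u] := by
      simp [pvPredsStep, hc]
    have hstep : pvIStep info (U.filter (fun x => !(dist.contains x))) u v =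
        info.insert v (dist.getD u 0 + 1, [u]) := by
      simp only [pvIStep, hpct, if_true, hfst]
    refine ⟨?_, by rw [hdd]; exact pvPend_erase U hU dist v _⟩
    rw [hstep, hdd, hpp]
    constructor
    · rw [PySem.Dict.keys_insert_of_not_contains (h := hicf),
        PySem.Dict.keys_insert_of_not_contains (h := hc), hrel.1]
    · intro x
      by_cases hx : x = v
      · subst hx
        rw [PySem.Dict.get?_insert_self,
          if_pos (by rw [PySem.Dict.contains_insert]; simp),
          PySem.Dict.getD_insert_self, PySem.Dict.getD_insert_self]
      · rw [PySem.Dict.get?_insert_of_ne (hne := hx), hrel.2 x,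
          PySem.Dict.contains_insert,
          PySem.Dict.getD_insert, if_neg hx, PySem.Dict.getD_insert, if_neg hx]
        have hxb : (x == v) = false := by simpa using hx
        rw [hxb, Bool.false_or]

theorem pvCouple (g : PySem.Dict Int (List Int)) (V : List Int)
    (hg : ∀ k vs, g.get? k = some vs → ∀ x ∈ vs, x ∈ V)
    (U : List Int) (hU : U.Nodup)
    (hgU : ∀ k vs, g.get? k = some vs → ∀ x ∈ vs, x ∈ U)
    (dist : PySem.Dict Int Int) (preds : PySem.Dict Int (List Int))
    (info : PySem.Dict Int (Int × List Int))
    (F : List (Int × Int)) (hF : ∀ e ∈ F, e.2 ∈ V) (hFU : ∀ e ∈ F, e.2 ∈ U)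
    (hrel : pvRel info dist preds) :
    pvRel (pvBfs g info (U.filter (fun x => !(dist.contains x))) F)
      (pvBloop g V dist preds F hg hF).1 (pvBloop g V dist preds F hg hF).2 := by
  match F, hF, hFU with
  | [], _, _ =>
    rw [pvBfs_nil, pvBloop_nil]
    exact hrel
  | (u, v) :: rest, hF, hFU =>
    have hvU : v ∈ U := hFU (u, v) List.mem_cons_self
    obtain ⟨hrel', hpend'⟩ := pvRelStep U hU info dist preds u v hrel hvU
    match hget : g.get? v with
    | none =>
      rw [pvBfs_cons_none g info _ u v rest hget,
        pvBloop_cons_none g V dist preds u v rest hget hg hF]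
      exact hrel'
    | some fr =>
      have hF' : ∀ e ∈ pvNextF (pvDistStep dist u v) v fr rest, e.2 ∈ V :=
        pvNextHF _ _ _ hg (fun e he => hF e (List.mem_cons_of_mem _ he)) hget
      have hFU' : ∀ e ∈ pvNextF (pvDistStep dist u v) v fr rest, e.2 ∈ U := by
        intro e he
        rcases List.mem_append.1 he with h | h
        · exact hFU e (List.mem_cons_of_mem _ h)
        · rcases List.mem_map.1 h with ⟨f, hff, rfl⟩
          exact hgU v fr hget f (List.mem_filter.1 hff).1
      rw [pvBloop_cons g V dist preds u v rest fr hget hg hF hF']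
      rw [pvBfs_cons g info _ u v rest fr hget]
      rw [hpend']
      have hfr_eq : fr.filter (U.filter (fun x => !((pvDistStep dist u v).contains x))).contains
          = fr.filter (fun f => !((pvDistStep dist u v).contains f)) :=
        List.filter_congr
          (fun f hf => pvPend_contains U (pvDistStep dist u v) f (hgU v fr hget f hf))
      rw [hfr_eq]
      exact pvCouple g V hg U hU hgU (pvDistStep dist u v) (pvPredsStep dist preds u v)
        (pvIStep info (U.filter (fun x => !(dist.contains x))) u v)
        (pvNextF (pvDistStep dist u v) v fr rest) hF' hFU' hrel'
  termination_by (V.countP (fun x => !(dist.contains x)), F.countP (fun e => dist.contains e.2))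
  decreasing_by
    exact pvMeasure_decStep V dist u v fr rest (hF (u, v) List.mem_cons_self)

theorem pvUniverse_spec (friendships : List (Int × List Int)) :
    ∀ k vs, (PySem.Dict.mk friendships).get? k = some vs →
      ∀ x ∈ vs, x ∈ pvUniverse friendships := by
  induction friendships with
  | nil => intro k vs h; simp [PySem.Dict.get?] at h
  | cons p t ih =>
    intro k vs h x hx
    rw [show (PySem.Dict.mk (p :: t)) = (PySem.Dict.mk ((p.1, p.2) :: t)) by rfl,
      PySem.Dict.get?_mk_cons] at h
    simp only [pvUniverse, PySem.List.mem_dedup, List.flatMap_cons, List.mem_append]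
    split at h
    · left; cases h; exact List.mem_cons_of_mem _ hx
    · right
      have := ih k vs h x hx
      simpa [pvUniverse, PySem.List.mem_dedup] using this

theorem pvReconI_eq (info : PySem.Dict Int (Int × List Int)) (FP : PySem.Dict Int (List Int))
    (h : ∀ v, (info.getD v (0, [])).2 = FP.getD v []) (s : Int) (order : List Int) :
    pvReconI info s order = pvRecon FP s order := by
  simp only [pvReconI, pvRecon]
  congr 1
  funext paths v
  rw [h v]

-- ---------- the reachable closure of the input graph (used by Pre_) ----------

theorem pvLen_le {l l' : List Int} (h1 : l.Nodup) (h2 : l ⊆ l') : l.length ≤ l'.length := by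
  calc l.length = l.toFinset.card := (List.toFinset_card_of_nodup h1).symm
    _ ≤ l'.toFinset.card :=
        Finset.card_le_card (fun x hx => List.mem_toFinset.2 (h2 (List.mem_toFinset.1 hx)))
    _ ≤ l'.length := List.toFinset_card_le l'

theorem pvStepR_append (g : PySem.Dict Int (List Int)) (seen : List Int) :
    ∃ t, pvStepR g seen = seen ++ t :=
  ⟨_, PySem.Set.update_eq_append_filter _ _⟩

theorem pvIter_nodup (g : PySem.Dict Int (List Int)) (s : Int) (i : Nat) :
    ((pvStepR g)^[i] [s]).Nodup := by
  induction i with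
  | zero => simp
  | succ k ih =>
    rw [Function.iterate_succ_apply']
    unfold pvStepR
    exact PySem.Set.nodup_update _ _ ih

theorem pvIter_mono (g : PySem.Dict Int (List Int)) (s : Int) {i j : Nat} (hij : i ≤ j) :
    (pvStepR g)^[i] [s] ⊆ (pvStepR g)^[j] [s] := by
  induction j with
  | zero =>
    have : i = 0 := Nat.le_zero.mp hij
    subst this
    exact fun x hx => hx
  | succ k ih =>
    rcases Nat.lt_or_ge i (k + 1) with hlt | hge
    · have h1 := ih (by omega)
      rw [Function.iterate_succ_apply']
      obtain ⟨t, ht⟩ := pvStepR_append g ((pvStepR g)^[k] [s])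
      rw [ht]
      exact fun x hx => List.mem_append_left _ (h1 hx)
    · have : i = k + 1 := by omega
      subst this
      exact fun x hx => hx

theorem pvGetD_mem (friendships : List (Int × List Int)) (y x : Int)
    (hx : x ∈ (PySem.Dict.mk friendships).getD y []) :
    x ∈ friendships.flatMap (fun p => p.1 :: p.2) := by
  rw [PySem.Dict.getD_eq_get?_getD] at hx
  cases h : (PySem.Dict.mk friendships).get? y with
  | none => rw [h] at hx; simp at hx
  | some vs =>
    rw [h] at hx
    simp only [Option.getD_some] at hx
    have := pvTargets_spec friendships y vs h x hx
    simp only [pvTargets] at this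
    rcases List.mem_flatMap.1 this with ⟨p, hp, hxp⟩
    exact List.mem_flatMap.2 ⟨p, hp, List.mem_cons_of_mem _ hxp⟩

theorem pvIter_sub (friendships : List (Int × List Int)) (s : Int) (i : Nat) :
    (pvStepR (PySem.Dict.mk friendships))^[i] [s]
      ⊆ s :: friendships.flatMap (fun p => p.1 :: p.2) := by
  induction i with
  | zero =>
    intro x hx
    rcases List.mem_singleton.1 hx with rfl
    exact List.mem_cons_self
  | succ k ih =>
    rw [Function.iterate_succ_apply']
    intro x hx
    unfold pvStepR at hx
    rcases (PySem.Set.mem_update _ _ _).1 hx with h | h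
    · exact ih h
    · rcases List.mem_flatMap.1 h with ⟨y, hy, hxy⟩
      exact List.mem_cons_of_mem _ (pvGetD_mem friendships y x hxy)

theorem pvGrow (g : PySem.Dict Int (List Int)) (s : Int) :
    ∀ i : Nat, (∀ j : Nat, j < i → (pvStepR g)^[j+1] [s] ≠ (pvStepR g)^[j] [s]) →
      i + 1 ≤ ((pvStepR g)^[i] [s]).length := by
  intro i
  induction i with
  | zero => intro _; simp
  | succ k ih =>
    intro h
    have h1 := ih (fun j hj => h j (by omega))
    have hne := h k (by omega)
    rw [Function.iterate_succ_apply'] at hne ⊢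
    obtain ⟨t, ht⟩ := pvStepR_append g ((pvStepR g)^[k] [s])
    rw [ht] at hne ⊢
    have ht0 : t ≠ [] := by
      intro h0
      rw [h0, List.append_nil] at hne
      exact hne rfl
    have ht1 : 1 ≤ t.length := by
      cases t with
      | nil => exact absurd rfl ht0
      | cons a b => simp
    rw [List.length_append]
    omega

theorem pvIter_stab (g : PySem.Dict Int (List Int)) (s : Int) {i : Nat}
    (h : (pvStepR g)^[i+1] [s] = (pvStepR g)^[i] [s]) :
    ∀ j, i ≤ j → (pvStepR g)^[j] [s] = (pvStepR g)^[i] [s] := by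
  intro j
  induction j with
  | zero =>
    intro hj
    have : i = 0 := Nat.le_zero.mp hj
    subst this
    rfl
  | succ k ih =>
    intro hj
    rcases Nat.lt_or_ge i (k + 1) with hlt | hge
    · have hik : i ≤ k := by omega
      rw [Function.iterate_succ_apply', ih hik,
        show pvStepR g ((pvStepR g)^[i] [s]) = (pvStepR g)^[i+1] [s] from
          (Function.iterate_succ_apply' _ _ _).symm, h]
    · have : i = k + 1 := by omega
      subst this
      rfl

theorem pvReach_fix (friendships : List (Int × List Int)) (s : Int) :
    s ∈ pvReach friendships s ∧
    ∀ x ∈ pvReach friendships s, ∀ fr, (PySem.Dict.mk friendships).get? x = some fr →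
      ∀ f ∈ fr, f ∈ pvReach friendships s := by
  have hbound : ∀ i : Nat, ((pvStepR (PySem.Dict.mk friendships))^[i] [s]).length
      ≤ (friendships.flatMap (fun p => p.1 :: p.2)).length + 1 := by
    intro i
    have := pvLen_le (pvIter_nodup (PySem.Dict.mk friendships) s i) (pvIter_sub friendships s i)
    simpa using this
  obtain ⟨i, hilt, hfix⟩ : ∃ i, i < (friendships.flatMap (fun p => p.1 :: p.2)).length + 1 ∧
      (pvStepR (PySem.Dict.mk friendships))^[i+1] [s]
        = (pvStepR (PySem.Dict.mk friendships))^[i] [s] := by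
    by_contra hno
    have hall : ∀ j, j < (friendships.flatMap (fun p => p.1 :: p.2)).length + 1 →
        (pvStepR (PySem.Dict.mk friendships))^[j+1] [s]
          ≠ (pvStepR (PySem.Dict.mk friendships))^[j] [s] := by
      intro j hj hEq
      exact hno ⟨j, hj, hEq⟩
    have h1 := pvGrow (PySem.Dict.mk friendships) s
      ((friendships.flatMap (fun p => p.1 :: p.2)).length + 1) hall
    have h2 := hbound ((friendships.flatMap (fun p => p.1 :: p.2)).length + 1)
    omega
  have hRn : pvReach friendships s = (pvStepR (PySem.Dict.mk friendships))^[i] [s] := by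
    unfold pvReach
    exact pvIter_stab (PySem.Dict.mk friendships) s hfix _ (le_of_lt hilt)
  have hstep : pvStepR (PySem.Dict.mk friendships) (pvReach friendships s)
      = pvReach friendships s := by
    rw [hRn,
      show pvStepR (PySem.Dict.mk friendships) ((pvStepR (PySem.Dict.mk friendships))^[i] [s])
          = (pvStepR (PySem.Dict.mk friendships))^[i+1] [s] from
        (Function.iterate_succ_apply' _ _ _).symm, hfix]
  constructor
  · have h0 : s ∈ (pvStepR (PySem.Dict.mk friendships))^[0] [s] := List.mem_singleton.2 rfl
    exact pvIter_mono (PySem.Dict.mk friendships) s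
      (Nat.zero_le ((friendships.flatMap (fun p => p.1 :: p.2)).length + 1)) h0
  · intro x hx fr hget f hf
    have hf2 : f ∈ pvStepR (PySem.Dict.mk friendships) (pvReach friendships s) := by
      unfold pvStepR
      refine (PySem.Set.mem_update _ _ _).2 (Or.inr ?_)
      refine List.mem_flatMap.2 ⟨x, hx, ?_⟩
      rw [PySem.Dict.getD_eq_get?_getD, hget]
      exact hf
    rw [hstep] at hf2
    exact hf2

theorem pvTopB (fuid : Int) (friendships : List (Int × List Int)) (fr : List Int)
    (hfr : (PySem.Dict.mk friendships).get? fuid = some fr) :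
    shortest_paths_from_alt fuid friendships =
      (pvReconI (pvBfs (PySem.Dict.mk friendships) ((PySem.Dict.empty).insert fuid (0, []))
          ((pvUniverse friendships).filter (fun x => !(x == fuid)))
          (fr.map (fun f => (fuid, f)))) fuid
        ((pvBfs (PySem.Dict.mk friendships) ((PySem.Dict.empty).insert fuid (0, []))
          ((pvUniverse friendships).filter (fun x => !(x == fuid)))
          (fr.map (fun f => (fuid, f)))).keys.drop 1)).items := by
  unfold shortest_paths_from_alt
  dsimp only
  split
  · next h => rw [hfr] at h; cases h
  · next fr' h => rw [hfr] at h; cases h; rfl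

theorem pvTopEq (fuid : Int) (friendships : List (Int × List Int))
    (hpre : Pre_shortest_paths_from fuid friendships) :
    shortest_paths_from fuid friendships = shortest_paths_from_alt fuid friendships := by
  obtain ⟨hmem, hreach⟩ := hpre
  have hkeysmk : (PySem.Dict.mk friendships).keys = friendships.map Prod.fst := by
    simp [PySem.Dict.keys]
  have hsome : ∀ x : Int, x ∈ friendships.map Prod.fst →
      ((PySem.Dict.mk friendships).get? x).isSome = true := by
    intro x hx
    cases h : (PySem.Dict.mk friendships).get? x with
    | some _ => rfl
    | none =>
      rw [PySem.Dict.get?_eq_none_iff_not_mem_keys, hkeysmk] at h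
      exact absurd hx h
  obtain ⟨fr, hfr⟩ : ∃ fr, (PySem.Dict.mk friendships).get? fuid = some fr := by
    have := hsome fuid hmem
    cases h : (PySem.Dict.mk friendships).get? fuid with
    | none => rw [h] at this; cases this
    | some fr => exact ⟨fr, rfl⟩
  have hreachfix := pvReach_fix friendships fuid
  have hsR : fuid ∈ pvReach friendships fuid := hreachfix.1
  have hRcl := hreachfix.2
  have hRsome : ∀ x ∈ pvReach friendships fuid,
      ((PySem.Dict.mk friendships).get? x).isSome = true :=
    fun x hx => hsome x (hreach x hx)
  have hFR0 : ∀ e ∈ (fr.map (fun f => (fuid, f))), e.2 ∈ pvReach friendships fuid := by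
    intro e he
    rcases List.mem_map.1 he with ⟨f, hf, rfl⟩
    exact hRcl fuid hsR fr hfr f hf
  have hF0 : ∀ e ∈ (fr.map (fun f => (fuid, f))), e.2 ∈ pvTargets friendships := by
    intro e he
    rcases List.mem_map.1 he with ⟨f, hf, rfl⟩
    exact pvTargets_spec friendships fuid fr hfr f hf
  have hFU0 : ∀ e ∈ (fr.map (fun f => (fuid, f))), e.2 ∈ pvUniverse friendships := by
    intro e he
    rcases List.mem_map.1 he with ⟨f, hf, rfl⟩
    exact pvUniverse_spec friendships fuid fr hfr f hf
  have hUnd : (pvUniverse friendships).Nodup := PySem.List.nodup_dedup _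
  have hrel0 : pvRel ((PySem.Dict.empty).insert fuid (0, []))
      ((PySem.Dict.empty).insert fuid 0) PySem.Dict.empty := by
    constructor
    · rw [PySem.Dict.keys_insert_of_not_contains (h := PySem.Dict.contains_empty _),
        PySem.Dict.keys_insert_of_not_contains (h := PySem.Dict.contains_empty _)]
      rfl
    · intro x
      by_cases hx : x = fuid
      · subst hx
        rw [PySem.Dict.get?_insert_self,
          if_pos (by rw [PySem.Dict.contains_insert]; simp),
          PySem.Dict.getD_insert_self, PySem.Dict.getD_empty]
      · rw [PySem.Dict.get?_insert_of_ne (hne := hx), PySem.Dict.get?_empty,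
          PySem.Dict.contains_insert, PySem.Dict.contains_empty]
        have hxb : (x == fuid) = false := by simpa using hx
        rw [hxb]
        rfl
  have hpend0 : (pvUniverse friendships).filter (fun x => !(x == fuid))
      = (pvUniverse friendships).filter
          (fun x => !(((PySem.Dict.empty (κ := Int) (ν := Int)).insert fuid 0).contains x)) := by
    apply List.filter_congr
    intro x _
    rw [PySem.Dict.contains_insert, PySem.Dict.contains_empty, Bool.or_false]
  have hcouple := pvCouple (PySem.Dict.mk friendships) (pvTargets friendships)
    (pvTargets_spec friendships) (pvUniverse friendships) hUnd
    (pvUniverse_spec friendships) ((PySem.Dict.empty).insert fuid 0) PySem.Dict.empty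
    ((PySem.Dict.empty).insert fuid (0, [])) (fr.map (fun f => (fuid, f))) hF0 hFU0 hrel0
  have hinv0 := pvInitJInv (PySem.Dict.mk friendships) fuid fr hfr
    (pvBloop (PySem.Dict.mk friendships) (pvTargets friendships)
      ((PySem.Dict.empty).insert fuid 0) PySem.Dict.empty
      (fr.map (fun f => (fuid, f))) (pvTargets_spec friendships) hF0).1
    (pvBloop (PySem.Dict.mk friendships) (pvTargets friendships)
      ((PySem.Dict.empty).insert fuid 0) PySem.Dict.empty
      (fr.map (fun f => (fuid, f))) (pvTargets_spec friendships) hF0).2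
  have hfst := pvBloop_final_state (PySem.Dict.mk friendships) (pvTargets friendships)
    (pvTargets_spec friendships) fuid ((PySem.Dict.empty).insert fuid 0) PySem.Dict.empty
    (fr.map (fun f => (fuid, f))) hF0 hinv0.bst hinv0.bfr
  have hsnd : ∀ v, ((pvBfs (PySem.Dict.mk friendships) ((PySem.Dict.empty).insert fuid (0, []))
      ((pvUniverse friendships).filter (fun x => !(x == fuid)))
      (fr.map (fun f => (fuid, f)))).getD v (0, [])).2
      = (pvBloop (PySem.Dict.mk friendships) (pvTargets friendships)
          ((PySem.Dict.empty).insert fuid 0) PySem.Dict.empty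
          (fr.map (fun f => (fuid, f))) (pvTargets_spec friendships) hF0).2.getD v [] := by
    intro v
    rw [hpend0]
    rw [PySem.Dict.getD_eq_get?_getD, hcouple.2 v]
    by_cases hv : (pvBloop (PySem.Dict.mk friendships) (pvTargets friendships)
        ((PySem.Dict.empty).insert fuid 0) PySem.Dict.empty
        (fr.map (fun f => (fuid, f))) (pvTargets_spec friendships) hF0).1.contains v = true
    · simp [hv]
    · rw [Bool.not_eq_true] at hv
      have hFPc : (pvBloop (PySem.Dict.mk friendships) (pvTargets friendships)
          ((PySem.Dict.empty).insert fuid 0) PySem.Dict.empty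
          (fr.map (fun f => (fuid, f))) (pvTargets_spec friendships) hF0).2.contains v
          = false := by
        cases hf : (pvBloop (PySem.Dict.mk friendships) (pvTargets friendships)
            ((PySem.Dict.empty).insert fuid 0) PySem.Dict.empty
            (fr.map (fun f => (fuid, f))) (pvTargets_spec friendships) hF0).2.contains v with
        | false => rfl
        | true =>
          have := (hfst.pKeys v hf).1
          rw [hv] at this
          cases this
      have hgd : (pvBloop (PySem.Dict.mk friendships) (pvTargets friendships)
          ((PySem.Dict.empty).insert fuid 0) PySem.Dict.empty
          (fr.map (fun f => (fuid, f))) (pvTargets_spec friendships) hF0).2.getD v [] = [] := by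
        apply PySem.Dict.getD_of_not_contains
        exact hFPc
      rw [hgd]
      simp [hv]
  rw [pvTopA fuid friendships fr hfr (pvTargets_spec friendships) hF0,
    pvTopB fuid friendships fr hfr]
  rw [pvReconI_eq _ _ hsnd fuid _]
  have hkeyseq := hcouple.1
  rw [hpend0]
  rw [hkeyseq]
  congr 1
  apply pvMain (PySem.Dict.mk friendships) (pvTargets friendships) (pvTargets_spec friendships)
    (pvReach friendships fuid) hRsome hRcl fuid _ _ _ _ hF0 hFR0 _ _ rfl
  exact pvInitJInv (PySem.Dict.mk friendships) fuid fr hfr _ _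

-- ===== VERDICT (by name: the statement is the Claim_ definition above) =====
theorem shortest_paths_from_spec : Claim_equal_shortest_paths_from := by
  intro from_user_id friendships _ hpre
  unfold Spec_shortest_paths_from
  exact pvTopEq from_user_id friendships hpre
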